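-- pv_equiv track=rewrite | github.com/kristiansordal/kattis | python/floodit2.py | solve
-- ===== SOURCE A (Python) =====
-- def bfs(grid, color, seen, n):
--     q = list(seen) if seen else [(0, 0)]
--     while q:
--         r, c = q.pop(0)
--
--         for dr, dc in ((0, 1), (0, -1), (1, 0), (-1, 0)):
--             rr, cc = r + dr, c + dc
--
--             if 0 <= rr < n and 0 <= cc < n and (rr, cc) not in seen:
--                 if grid[rr][cc] == color:
--                     q.append((rr, cc))  # type: ignore
--                     seen.add((rr, cc))
--
--     return seen
--
-- def solve(grid, n):
--     SEEN = {(0, 0)}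
--     COUNTS = {i: 0 for i in range(1, 7)}
--     moves = 0
--
--     while len(SEEN) < n * n:
--         ns = []
--
--         sc = bfs(grid, grid[0][0], SEEN, n)
--
--         for color in range(1, 7):
--             if color != grid[0][0]:
--                 ns.append((color, bfs(grid, color, sc.copy(), n)))
--
--         color, SEEN = sorted(ns, key=lambda x: (-len(x[1]), x[0]))[0]
--         COUNTS[color] += 1
--         moves += 1
--
--         for r, c in SEEN:
--             grid[r][c] = color
--
--     return moves, COUNTS
-- ===== SOURCE B (Python) =====
-- def solve(grid, n):
--     # B: label the monochromatic components of the grid ONCE, build the component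
--     # adjacency graph, and run the greedy entirely on that graph (per round: sum the
--     # sizes of boundary components per color); no repeated flood fills, and the grid
--     # is never repainted (A mutates grid in place; B does not).
--     if n <= 1:
--         return 0, {i: 0 for i in range(1, 7)}
--     comp, colorof, sizes = {}, {}, {}
--     for r0 in range(n):
--         for c0 in range(n):
--             if (r0, c0) not in comp:
--                 cid = len(colorof)
--                 col = grid[r0][c0]
--                 comp[(r0, c0)] = cid
--                 stack = [(r0, c0)]
--                 size = 1
--                 while stack:
--                     r, c = stack.pop()
--                     for rr, cc in ((r + 1, c), (r - 1, c), (r, c + 1), (r, c - 1)):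
--                         if 0 <= rr < n and 0 <= cc < n and (rr, cc) not in comp and grid[rr][cc] == col:
--                             comp[(rr, cc)] = cid
--                             stack.append((rr, cc))
--                             size += 1
--                 colorof[cid] = col
--                 sizes[cid] = size
--     nbrs = {k: set() for k in colorof}
--     for r in range(n):
--         for c in range(n):
--             for rr, cc in ((r + 1, c), (r, c + 1)):
--                 if rr < n and cc < n and comp[(r, c)] != comp[(rr, cc)]:
--                     nbrs[comp[(r, c)]].add(comp[(rr, cc)])
--                     nbrs[comp[(rr, cc)]].add(comp[(r, c)])
--     region = {comp[(0, 0)]}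
--     cells = sizes[comp[(0, 0)]]
--     cur = colorof[comp[(0, 0)]]
--     chosen = []
--     while cells < n * n:
--         boundary = {k for j in region for k in nbrs[j] if k not in region}
--         best = None
--         for color in range(1, 7):
--             if color != cur:
--                 gain = sum(sizes[k] for k in boundary if colorof[k] == color)
--                 if best is None or gain > best[0]:
--                     best = (gain, color)
--         gain, cur = best
--         region |= {k for k in boundary if colorof[k] == cur}
--         cells += gain
--         chosen.append(cur)
--     return len(chosen), {i: chosen.count(i) for i in range(1, 7)}
-- ===== Notes on version B (the rewrite author's own statement) =====
-- stated objective: alternative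
-- what changed: B labels the monochromatic components of the grid once, builds the component adjacency graph, and runs the greedy purely on that graph (per round it sums the sizes of boundary components per color and merges the chosen ones), so A's six repeated BFS flood fills of the grid per move disappear entirely and the grid is never repainted.
-- intended difference: On monochromatic n x n grids with n >= 2 A still enters its loop once because SEEN starts as {(0,0)} and returns 1 move with one color counted, while B sees the whole board already flooded and returns 0 moves with all counts zero, which is the intended answer for an already-flooded board. — e.g. on solve([[1, 1], [1, 1]], 2): A returns (1, [(1, 0), (2, 1), (3, 0), (4, 0), (5, 0), (6, 0)]), B returns (0, [(1, 0), (2, 0), (3, 0), (4, 0), (5, 0), (6, 0)])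
import Mathlib
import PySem

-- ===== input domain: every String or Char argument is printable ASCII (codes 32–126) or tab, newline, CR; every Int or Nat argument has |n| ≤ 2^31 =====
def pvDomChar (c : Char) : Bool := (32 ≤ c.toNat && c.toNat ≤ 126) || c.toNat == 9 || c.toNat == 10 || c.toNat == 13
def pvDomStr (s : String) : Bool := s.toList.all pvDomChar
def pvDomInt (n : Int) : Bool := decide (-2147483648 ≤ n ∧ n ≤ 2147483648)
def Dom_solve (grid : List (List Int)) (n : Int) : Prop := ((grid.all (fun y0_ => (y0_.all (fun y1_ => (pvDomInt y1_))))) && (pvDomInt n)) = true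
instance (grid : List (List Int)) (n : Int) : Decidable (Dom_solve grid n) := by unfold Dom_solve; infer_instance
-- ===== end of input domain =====

-- B labels the monochromatic components of the grid once, builds the component
-- adjacency graph and runs the greedy on that graph (per round: per-colour sums of
-- boundary-component sizes) instead of A's repeated per-move BFS flood fills
-- (objective: alternative).  A mutates `grid` in place, B does not; the
-- equivalence proved here is about the return value.

-- ===== PORT A =====
-- grid[r][c] read / write; exact for 0 ≤ r < len grid, 0 ≤ c < len row, which the
-- bounds guards plus Pre_solve's shape clause guarantee wherever these run.
def pvAt (g : List (List Int)) (r c : Int) : Int :=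
  PySem.List.pyGetD (PySem.List.pyGetD g r []) c 0

def pvSet2d (g : List (List Int)) (r c v : Int) : List (List Int) :=
  PySem.List.pySetD g r (PySem.List.pySetD (PySem.List.pyGetD g r []) c v)

-- for r, c in SEEN: grid[r][c] = color
def pvPaint (g : List (List Int)) (l : List (Int × Int)) (v : Int) : List (List Int) :=
  l.foldl (fun g rc => pvSet2d g rc.1 rc.2 v) g

def pvDirsA : List (Int × Int) := [(0,1), (0,-1), (1,0), (-1,0)]

-- body of A's `for dr, dc in ...` over the state (q, seen)
def pvBfsProc (g : List (List Int)) (color n r c : Int)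
    (st : List (Int × Int) × List (Int × Int)) (d : Int × Int) :
    List (Int × Int) × List (Int × Int) :=
  let rr := r + d.1
  let cc := c + d.2
  if 0 ≤ rr ∧ rr < n ∧ 0 ≤ cc ∧ cc < n ∧ (rr, cc) ∉ st.2 then
    if pvAt g rr cc = color then (st.1 ++ [(rr, cc)], PySem.Set.add st.2 (rr, cc)) else st
  else st

-- A's `while q:` loop; fuel only makes the recursion structural (3*n*n+1 provably
-- exceeds the number of iterations whenever the loop is reached from `solve`).
def pvBfsLoop (g : List (List Int)) (color n : Int) :
    Nat → List (Int × Int) → List (Int × Int) → List (Int × Int)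
  | 0, _, seen => seen
  | _ + 1, [], seen => seen
  | fuel + 1, (r, c) :: q, seen =>
      let st := pvDirsA.foldl (pvBfsProc g color n r c) (q, seen)
      pvBfsLoop g color n fuel st.1 st.2

def pvBfs (g : List (List Int)) (color : Int) (seen : List (Int × Int)) (n : Int) :
    List (Int × Int) :=
  pvBfsLoop g color n ((3 * n * n).toNat + 1)
    (if seen.isEmpty then [((0 : Int), (0 : Int))] else seen) seen

-- COUNTS = {i: 0 for i in range(1, 7)}
def pvCountsA0 : PySem.Dict Int Int :=
  (PySem.List.pyRange 1 7).foldl (fun d i => d.insert i 0) ⟨[]⟩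

-- A's `while len(SEEN) < n * n:` loop; fuel (n*n+1) likewise only structural.
def pvSolveLoopA (n : Int) :
    Nat → List (List Int) → List (Int × Int) → PySem.Dict Int Int → Int →
    Int × List (Int × Int)
  | 0, _, _, counts, moves => (moves, counts.items)
  | fuel + 1, g, seen, counts, moves =>
    if (seen.length : Int) < n * n then
      let c0 := pvAt g 0 0
      let sc := pvBfs g c0 seen n
      let ns := (PySem.List.pyRange 1 7).foldl
        (fun acc color => if color ≠ c0 then acc ++ [(color, pvBfs g color sc n)] else acc)
        ([] : List (Int × List (Int × Int)))
      match PySem.List.sorted2 ns (fun x => -(x.2.length : Int)) (fun x => x.1) with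
      | [] => (moves, counts.items)  -- unreachable: ns always has ≥ 5 entries
      | (color, seen') :: _ =>
          pvSolveLoopA n fuel (pvPaint g seen' color) seen'
            (counts.insert color (counts.getD color 0 + 1)) (moves + 1)
    else (moves, counts.items)

def solve (grid : List (List Int)) (n : Int) : Int × (List (Int × Int)) :=
  pvSolveLoopA n ((n * n).toNat + 1) grid [((0 : Int), (0 : Int))] pvCountsA0 0

-- ===== PORT B =====
-- B's component labelling DFS (`while stack:` with pop from the end = head of the
-- Lean list); marks cells in the dict `comp` before pushing, exactly as Source B.
def pvDirsB : List (Int × Int) := [(1,0), (-1,0), (0,1), (0,-1)]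

def pvLabelStep (g : List (List Int)) (col n cid r c : Int)
    (st : PySem.Dict (Int × Int) Int × List (Int × Int) × Int) (d : Int × Int) :
    PySem.Dict (Int × Int) Int × List (Int × Int) × Int :=
  if 0 ≤ r + d.1 ∧ r + d.1 < n ∧ 0 ≤ c + d.2 ∧ c + d.2 < n ∧
      ¬ (st.1.contains (r + d.1, c + d.2)) ∧ pvAt g (r + d.1) (c + d.2) = col then
    (st.1.insert (r + d.1, c + d.2) cid, (r + d.1, c + d.2) :: st.2.1, st.2.2 + 1)
  else st

def pvLabelLoop (g : List (List Int)) (col n cid : Int) :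
    Nat → List (Int × Int) → PySem.Dict (Int × Int) Int → Int →
    PySem.Dict (Int × Int) Int × Int
  | 0, _, comp, size => (comp, size)
  | _ + 1, [], comp, size => (comp, size)
  | fuel + 1, (r, c) :: stack, comp, size =>
      let st := pvDirsB.foldl (pvLabelStep g col n cid r c) (comp, stack, size)
      pvLabelLoop g col n cid fuel st.2.1 st.1 st.2.2

-- body of the nested `for r0 / for c0` scan: seed a DFS at every unlabelled cell
def pvLabelCell (g : List (List Int)) (n : Int)
    (st : PySem.Dict (Int × Int) Int × PySem.Dict Int Int × PySem.Dict Int Int)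
    (rc : Int × Int) :
    PySem.Dict (Int × Int) Int × PySem.Dict Int Int × PySem.Dict Int Int :=
  -- cid = len(colorof), col = grid[r0][c0], res = the seeded DFS (written out inline)
  if ¬ (st.1.contains rc) then
    ((pvLabelLoop g (pvAt g rc.1 rc.2) n (st.2.1.size : Int) ((n * n).toNat + 1) [rc]
        (st.1.insert rc (st.2.1.size : Int)) 1).1,
     st.2.1.insert (st.2.1.size : Int) (pvAt g rc.1 rc.2),
     st.2.2.insert (st.2.1.size : Int)
       (pvLabelLoop g (pvAt g rc.1 rc.2) n (st.2.1.size : Int) ((n * n).toNat + 1) [rc]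
         (st.1.insert rc (st.2.1.size : Int)) 1).2)
  else st

def pvLabelAll (g : List (List Int)) (n : Int) :
    PySem.Dict (Int × Int) Int × PySem.Dict Int Int × PySem.Dict Int Int :=
  (PySem.List.pyRange 0 n).foldl
    (fun st r0 => (PySem.List.pyRange 0 n).foldl (fun st c0 => pvLabelCell g n st (r0, c0)) st)
    (⟨[]⟩, ⟨[]⟩, ⟨[]⟩)

-- nbrs = {k: set() for k in colorof}; then the right/down neighbour scan
def pvNbrsCell (comp : PySem.Dict (Int × Int) Int) (n : Int)
    (nbrs : PySem.Dict Int (List Int)) (rc : Int × Int) : PySem.Dict Int (List Int) :=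
  [(rc.1 + 1, rc.2), (rc.1, rc.2 + 1)].foldl
    (fun nbrs y =>
      if y.1 < n ∧ y.2 < n ∧ comp.getD rc 0 ≠ comp.getD y 0 then
        (nbrs.modify (comp.getD rc 0) [] (fun s => PySem.Set.add s (comp.getD y 0))).modify
          (comp.getD y 0) [] (fun s => PySem.Set.add s (comp.getD rc 0))
      else nbrs)
    nbrs

def pvNbrsAll (comp : PySem.Dict (Int × Int) Int) (colorof : PySem.Dict Int Int) (n : Int) :
    PySem.Dict Int (List Int) :=
  (PySem.List.pyRange 0 n).foldl
    (fun nb r => (PySem.List.pyRange 0 n).foldl (fun nb c => pvNbrsCell comp n nb (r, c)) nb)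
    (colorof.keys.foldl (fun d k => d.insert k ([] : List Int)) ⟨[]⟩)

-- return (len(chosen), {i: chosen.count(i) for i in range(1, 7)})
def pvOutB (chosen : List Int) : Int × List (Int × Int) :=
  ((chosen.length : Int),
   ((PySem.List.pyRange 1 7).foldl
      (fun d i => d.insert i ((PySem.List.count chosen i : Nat) : Int))
      (⟨[]⟩ : PySem.Dict Int Int)).items)

-- B's `while cells < n * n:` greedy loop on the component graph; fuel structural.
def pvSolveLoopB (n : Int) (colorof sizes : PySem.Dict Int Int)
    (nbrs : PySem.Dict Int (List Int)) :
    Nat → List Int → Int → Int → List Int → Int × List (Int × Int)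
  | 0, _, _, _, chosen => pvOutB chosen
  | fuel + 1, region, cells, cur, chosen =>
    if cells < n * n then
      let boundary := region.foldl
        (fun acc j => (nbrs.getD j []).foldl
          (fun acc k => if k ∈ region then acc else PySem.Set.add acc k) acc) []
      let best := (PySem.List.pyRange 1 7).foldl
        (fun best color =>
          if color ≠ cur then
            let gain := boundary.foldl
              (fun s k => if colorof.getD k 0 = color then s + sizes.getD k 0 else s) 0
            match best with
            | none => some (gain, color)
            | some b => if b.1 < gain then some (gain, color) else best
          else best)
        (none : Option (Int × Int))
      match best with
      | none => pvOutB chosen  -- unreachable: at least five colours differ from cur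
      | some (gain, cur') =>
          let region' := PySem.Set.update region
            (boundary.filter (fun k => colorof.getD k 0 = cur'))
          pvSolveLoopB n colorof sizes nbrs fuel region' (cells + gain) cur' (chosen ++ [cur'])
    else pvOutB chosen

def solve_alt (grid : List (List Int)) (n : Int) : Int × (List (Int × Int)) :=
  if n ≤ 1 then
    ((0 : Int),
     ((PySem.List.pyRange 1 7).foldl (fun d i => d.insert i 0)
        (⟨[]⟩ : PySem.Dict Int Int)).items)
  else
    let lab := pvLabelAll grid n
    let comp := lab.1
    let colorof := lab.2.1
    let sizes := lab.2.2
    let nbrs := pvNbrsAll comp colorof n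
    let k0 := comp.getD ((0 : Int), (0 : Int)) 0
    pvSolveLoopB n colorof sizes nbrs ((n * n).toNat + 1)
      [k0] (sizes.getD k0 0) (colorof.getD k0 0) []

-- ===== PRECONDITION & SPEC =====
-- Pre_solve admits the degenerate sizes (n*n ≤ 1, where A's loop body never runs) and
-- square n×n grids with all colours in 1..6.  Outside it the Python A almost always
-- diverges (a cell whose colour is outside 1..6 can never be flooded; for negative n no
-- cell ever is) or raises IndexError (grid smaller than n×n); on the rare outside
-- inputs that do return (every cell carrying one same out-of-range colour) see the
-- cite in claim.json.
def Pre_solve (grid : List (List Int)) (n : Int) : Prop :=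
  n * n ≤ 1 ∨
    (2 ≤ n ∧ (grid.length : Int) = n ∧ (∀ row ∈ grid, (row.length : Int) = n) ∧
      (∀ row ∈ grid, ∀ v ∈ row, 1 ≤ v ∧ v ≤ 6))
instance (grid : List (List Int)) (n : Int) : Decidable (Pre_solve grid n) := by
  unfold Pre_solve; infer_instance

def pvWitness_solve : List (List Int) × Int := ([[1, 2], [3, 4]], 2)

-- On monochromatic n×n grids with n ≥ 2, A still enters its loop once (SEEN starts as
-- {(0,0)}) and returns 1 move with one colour counted, while B sees the board already
-- flooded and returns 0 moves with all counts zero — the intended answer.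
def D_solve (grid : List (List Int)) (n : Int) : Prop :=
  2 ≤ n ∧ ∀ row ∈ grid, ∀ v ∈ row, v = (grid.headD []).headD 0
instance (grid : List (List Int)) (n : Int) : Decidable (D_solve grid n) := by
  unfold D_solve; infer_instance

def Spec_solve (grid : List (List Int)) (n : Int) (out : Int × (List (Int × Int))) : Prop :=
  ¬ D_solve grid n → out = solve_alt grid n
instance (grid : List (List Int)) (n : Int) (out : Int × (List (Int × Int))) :
    Decidable (Spec_solve grid n out) := by unfold Spec_solve; infer_instance

def pvDiffWitness_solve : List (List Int) × Int := ([[1, 1], [1, 1]], 2)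
def pvDiffWitnessOut_solve : (Int × (List (Int × Int))) × (Int × (List (Int × Int))) :=
  ((1, [(1, 0), (2, 1), (3, 0), (4, 0), (5, 0), (6, 0)]),
   (0, [(1, 0), (2, 0), (3, 0), (4, 0), (5, 0), (6, 0)]))

-- ===== CLAIM (what is proved, stated in full; the proofs are below) =====
def Claim_unchanged_solve : Prop := ∀ (grid : List (List Int)) (n : Int),
  Dom_solve grid n → Pre_solve grid n → Spec_solve grid n (solve grid n)
def Claim_changed_solve : Prop :=
  Dom_solve (pvDiffWitness_solve.1) (pvDiffWitness_solve.2) ∧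
  Pre_solve (pvDiffWitness_solve.1) (pvDiffWitness_solve.2) ∧
  D_solve (pvDiffWitness_solve.1) (pvDiffWitness_solve.2) ∧
  solve (pvDiffWitness_solve.1) (pvDiffWitness_solve.2) = pvDiffWitnessOut_solve.1 ∧
  solve_alt (pvDiffWitness_solve.1) (pvDiffWitness_solve.2) = pvDiffWitnessOut_solve.2 ∧
  pvDiffWitnessOut_solve.1 ≠ pvDiffWitnessOut_solve.2
def Claim_exact_solve : Prop := ∀ (grid : List (List Int)) (n : Int),
  Dom_solve grid n → Pre_solve grid n → D_solve grid n → solve grid n ≠ solve_alt grid n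

-- ===== LEMMAS AND PROOFS =====

-- ---- basic spec notions (proof-only) ----
def pvInB (n : Int) (x : Int × Int) : Prop := 0 ≤ x.1 ∧ x.1 < n ∧ 0 ≤ x.2 ∧ x.2 < n

def pvGood (g : List (List Int)) (color n : Int) (x : Int × Int) : Prop :=
  pvInB n x ∧ pvAt g x.1 x.2 = color

def pvAdj (x y : Int × Int) : Prop :=
  y = (x.1, x.2 + 1) ∨ y = (x.1, x.2 - 1) ∨ y = (x.1 + 1, x.2) ∨ y = (x.1 - 1, x.2)

inductive pvReach (good : Int × Int → Prop) (P : Int × Int → Prop) : Int × Int → Prop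
  | base (x : Int × Int) : P x → pvReach good P x
  | step (x y : Int × Int) : pvReach good P x → pvAdj x y → good y → pvReach good P y

lemma pvAdj_symm {x y : Int × Int} (h : pvAdj x y) : pvAdj y x := by
  obtain ⟨a, b⟩ := x; obtain ⟨c, d⟩ := y
  rcases h with h | h | h | h <;> simp_all [pvAdj, Prod.ext_iff] <;> omega

lemma pvReach_subset {good P : Int × Int → Prop} {S : List (Int × Int)}
    (hbase : ∀ x, P x → x ∈ S)
    (hclosed : ∀ x ∈ S, ∀ y, pvAdj x y → good y → y ∈ S) :
    ∀ x, pvReach good P x → x ∈ S := by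
  intro x hx
  induction hx with
  | base x h => exact hbase x h
  | step x y _ hadj hg ih => exact hclosed x ih y hadj hg

lemma pvReach_congr {good P Q : Int × Int → Prop} (h : ∀ z, P z ↔ Q z) :
    ∀ x, pvReach good P x → pvReach good Q x := by
  intro x hx
  induction hx with
  | base x hp => exact pvReach.base x ((h x).1 hp)
  | step x y _ hadj hg ih => exact pvReach.step x y ih hadj hg

lemma pvReach_mono {good P Q : Int × Int → Prop} (h : ∀ z, P z → pvReach good Q z) :
    ∀ x, pvReach good P x → pvReach good Q x := by
  intro x hx
  induction hx with
  | base x hp => exact h x hp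
  | step x y _ hadj hg ih => exact pvReach.step x y ih hadj hg

lemma pvReach_good {good : Int × Int → Prop} {s x : Int × Int} (hs : good s)
    (h : pvReach good (fun z => z = s) x) : good x := by
  induction h with
  | base x hp => exact hp ▸ hs
  | step x y _ _ hg _ => exact hg

lemma pvReach_symm {good : Int × Int → Prop} {s : Int × Int} (hs : good s) :
    ∀ x, pvReach good (fun z => z = s) x → pvReach good (fun z => z = x) s := by
  intro x hx
  induction hx with
  | base x hp => subst hp; exact pvReach.base x rfl
  | step x y hr hadj hg ih =>
      refine pvReach_mono (Q := fun z => z = y) ?_ s ih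
      intro z hz
      subst hz
      exact pvReach.step y z (pvReach.base y rfl) (pvAdj_symm hadj) (pvReach_good hs hr)

lemma pvCardLe {n : Int} {l : List (Int × Int)} (hnd : l.Nodup)
    (hin : ∀ x ∈ l, pvInB n x) : l.length ≤ n.toNat * n.toNat := by
  classical
  have hsub : l.toFinset ⊆ (Finset.Ico (0 : Int) n) ×ˢ (Finset.Ico (0 : Int) n) := by
    intro x hx
    have hx' := hin x (List.mem_toFinset.1 hx)
    rcases hx' with ⟨h1, h2, h3, h4⟩
    simp [Finset.mem_product, Finset.mem_Ico]
    exact ⟨⟨h1, h2⟩, h3, h4⟩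
  have hcard := Finset.card_le_card hsub
  have h1 : l.toFinset.card = l.length := List.toFinset_card_of_nodup hnd
  have h2 : ((Finset.Ico (0 : Int) n) ×ˢ (Finset.Ico (0 : Int) n)).card
      = n.toNat * n.toNat := by
    simp [Finset.card_product, Int.card_Ico]
  omega

lemma pvCardLt {n : Int} {l : List (Int × Int)} {y : Int × Int} (hnd : l.Nodup)
    (hin : ∀ x ∈ l, pvInB n x) (hy : pvInB n y) (hyl : y ∉ l) :
    l.length < n.toNat * n.toNat := by
  classical
  have := pvCardLe (l := y :: l) (List.nodup_cons.2 ⟨hyl, hnd⟩)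
    (by intro x hx; rcases List.mem_cons.1 hx with rfl | hx; exacts [hy, hin x hx])
  simpa using this

lemma pvLenEq {A B : List (Int × Int)} (hA : A.Nodup) (hB : B.Nodup)
    (h : ∀ x, x ∈ A ↔ x ∈ B) : A.length = B.length :=
  ((List.perm_ext_iff_of_nodup hA hB).2 h).length_eq

lemma pvAdd_eq {s : List (Int × Int)} {x : Int × Int} (h : x ∉ s) :
    PySem.Set.add s x = s ++ [x] := by
  simp [PySem.Set.add, h]

lemma pvMemAdd {s : List (Int × Int)} {x y : Int × Int} :
    y ∈ PySem.Set.add s x ↔ y ∈ s ∨ y = x := by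
  unfold PySem.Set.add
  by_cases hx : x ∈ s
  · rw [if_pos (by simpa using hx)]
    constructor
    · exact Or.inl
    · rintro (h | rfl)
      · exact h
      · exact hx
  · rw [if_neg (by simpa using hx)]
    simp

lemma pvMemAddI {s : List Int} {x y : Int} :
    y ∈ PySem.Set.add s x ↔ y ∈ s ∨ y = x := by
  unfold PySem.Set.add
  by_cases hx : x ∈ s
  · rw [if_pos (by simpa using hx)]
    constructor
    · exact Or.inl
    · rintro (h | rfl)
      · exact h
      · exact hx
  · rw [if_neg (by simpa using hx)]
    simp

lemma pvNodupAddI {s : List Int} {x : Int} (h : s.Nodup) :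
    (PySem.Set.add s x).Nodup := by
  unfold PySem.Set.add
  by_cases hx : x ∈ s
  · rw [if_pos (by simpa using hx)]; exact h
  · rw [if_neg (by simpa using hx)]
    refine List.Nodup.append h (List.nodup_singleton x) ?_
    intro a ha hb
    simp only [List.mem_singleton] at hb
    subst hb
    exact hx ha

lemma pvBfsProc_eq (g : List (List Int)) (color n r c : Int)
    (st : List (Int × Int) × List (Int × Int)) (d : Int × Int) :
    pvBfsProc g color n r c st d =
      if 0 ≤ r + d.1 ∧ r + d.1 < n ∧ 0 ≤ c + d.2 ∧ c + d.2 < n ∧ (r + d.1, c + d.2) ∉ st.2 then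
        if pvAt g (r + d.1) (c + d.2) = color then
          (st.1 ++ [(r + d.1, c + d.2)], PySem.Set.add st.2 (r + d.1, c + d.2))
        else st
      else st := rfl

-- ---- the inner for-loop of A's bfs ----
lemma pvProc_mono (g : List (List Int)) (color n r c : Int)
    (st : List (Int × Int) × List (Int × Int)) (d : Int × Int) {x : Int × Int}
    (hx : x ∈ st.2) : x ∈ (pvBfsProc g color n r c st d).2 := by
  rw [pvBfsProc_eq]
  split_ifs with h1 h2
  · simp only [pvMemAdd]
    exact Or.inl hx
  · exact hx
  · exact hx

lemma pvFoldProc_mono (g : List (List Int)) (color n r c : Int) :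
    ∀ (ds : List (Int × Int)) (st : List (Int × Int) × List (Int × Int)) {x : Int × Int},
      x ∈ st.2 → x ∈ (ds.foldl (pvBfsProc g color n r c) st).2 := by
  intro ds
  induction ds with
  | nil => intro st x hx; exact hx
  | cons d ds ih =>
      intro st x hx
      exact ih _ (pvProc_mono g color n r c st d hx)

lemma pvProc_hit (g : List (List Int)) (color n r c : Int)
    (st : List (Int × Int) × List (Int × Int)) (d : Int × Int)
    (hg : pvGood g color n (r + d.1, c + d.2)) :
    (r + d.1, c + d.2) ∈ (pvBfsProc g color n r c st d).2 := by
  by_cases hx : (r + d.1, c + d.2) ∈ st.2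
  · exact pvProc_mono g color n r c st d hx
  · rcases hg with ⟨⟨h1, h2, h3, h4⟩, h5⟩
    rw [pvBfsProc_eq, if_pos ⟨h1, h2, h3, h4, hx⟩, if_pos h5]
    simp [pvMemAdd]

lemma pvFoldProc_hit (g : List (List Int)) (color n r c : Int) :
    ∀ (ds : List (Int × Int)) (st : List (Int × Int) × List (Int × Int)) (d : Int × Int),
      d ∈ ds → pvGood g color n (r + d.1, c + d.2) →
      (r + d.1, c + d.2) ∈ (ds.foldl (pvBfsProc g color n r c) st).2 := by
  intro ds
  induction ds with
  | nil => intro st d hd; simp at hd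
  | cons d' ds ih =>
      intro st d hd hg
      rcases List.mem_cons.1 hd with rfl | hd'
      · exact pvFoldProc_mono g color n r c ds _ (pvProc_hit g color n r c st d hg)
      · exact ih _ d hd' hg

lemma pvAdj_iff_dir (r c : Int) (y : Int × Int) :
    pvAdj (r, c) y ↔ ∃ d ∈ pvDirsA, y = (r + d.1, c + d.2) := by
  constructor
  · rintro (rfl | rfl | rfl | rfl)
    · exact ⟨(0, 1), by simp [pvDirsA], by simp⟩
    · exact ⟨(0, -1), by simp [pvDirsA], by simp [sub_eq_add_neg]⟩
    · exact ⟨(1, 0), by simp [pvDirsA], by simp⟩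
    · exact ⟨(-1, 0), by simp [pvDirsA], by simp [sub_eq_add_neg]⟩
  · rintro ⟨d, hd, rfl⟩
    fin_cases hd <;> simp [pvAdj, sub_eq_add_neg]

def pvProcInv (g : List (List Int)) (color n r c : Int)
    (q' seen : List (Int × Int)) (st : List (Int × Int) × List (Int × Int)) : Prop :=
  ∃ l, st.1 = q' ++ l ∧ st.2 = seen ++ l ∧ (seen ++ l).Nodup ∧
    (∀ y ∈ l, y ∉ seen ∧ pvGood g color n y ∧ pvAdj (r, c) y)

lemma pvProc_inv (g : List (List Int)) (color n r c : Int)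
    (q' seen : List (Int × Int)) (st : List (Int × Int) × List (Int × Int))
    (d : Int × Int) (hd : d ∈ pvDirsA)
    (h : pvProcInv g color n r c q' seen st) :
    pvProcInv g color n r c q' seen (pvBfsProc g color n r c st d) := by
  rcases h with ⟨l, h1, h2, h3, h4⟩
  rw [pvBfsProc_eq]
  split_ifs with hc1 hc2
  · refine ⟨l ++ [(r + d.1, c + d.2)], ?_, ?_, ?_, ?_⟩
    · simp [h1]
    · rw [pvAdd_eq hc1.2.2.2.2, h2, List.append_assoc]
    · rw [← List.append_assoc]
      refine List.Nodup.append h3 (by simp) ?_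
      intro a ha hb
      simp only [List.mem_singleton] at hb
      subst hb
      exact hc1.2.2.2.2 (by rw [h2]; exact ha)
    · intro y hy
      rcases List.mem_append.1 hy with hy | hy
      · exact h4 y hy
      · simp at hy
        subst hy
        have hnot : (r + d.1, c + d.2) ∉ seen ++ l := h2 ▸ hc1.2.2.2.2
        refine ⟨fun hmem => hnot (List.mem_append.2 (Or.inl hmem)), ⟨⟨hc1.1, hc1.2.1, hc1.2.2.1, hc1.2.2.2.1⟩, hc2⟩, ?_⟩
        exact (pvAdj_iff_dir r c _).2 ⟨d, hd, rfl⟩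
  · exact ⟨l, h1, h2, h3, h4⟩
  · exact ⟨l, h1, h2, h3, h4⟩

lemma pvFoldProc_inv (g : List (List Int)) (color n r c : Int)
    (q' seen : List (Int × Int)) :
    ∀ (ds : List (Int × Int)), (∀ d ∈ ds, d ∈ pvDirsA) →
    ∀ (st : List (Int × Int) × List (Int × Int)),
      pvProcInv g color n r c q' seen st →
      pvProcInv g color n r c q' seen (ds.foldl (pvBfsProc g color n r c) st) := by
  intro ds
  induction ds with
  | nil => intro _ st h; exact h
  | cons d ds ih =>
      intro hds st h
      exact ih (fun d' hd' => hds d' (List.mem_cons_of_mem d hd'))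
        _ (pvProc_inv g color n r c q' seen st d (hds d List.mem_cons_self) h)

-- ---- A's bfs loop: the result is the reachable set ----
lemma pvBfsLoop_spec (g : List (List Int)) (color n : Int) (P : Int × Int → Prop) :
    ∀ (fuel : Nat) (q seen : List (Int × Int)),
      seen.Nodup →
      (∀ x ∈ seen, pvInB n x) →
      (∀ x ∈ seen, pvReach (pvGood g color n) P x) →
      (∀ x ∈ q, x ∈ seen) →
      (∀ x ∈ seen, (∀ y, pvAdj x y → pvGood g color n y → y ∈ seen) ∨ x ∈ q) →
      q.length + 2 * (n.toNat * n.toNat - seen.length) ≤ fuel →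
      (∀ x ∈ seen, x ∈ pvBfsLoop g color n fuel q seen) ∧
      (pvBfsLoop g color n fuel q seen).Nodup ∧
      (∀ x ∈ pvBfsLoop g color n fuel q seen, pvInB n x) ∧
      (∀ x ∈ pvBfsLoop g color n fuel q seen, pvReach (pvGood g color n) P x) ∧
      (∀ x ∈ pvBfsLoop g color n fuel q seen, ∀ y, pvAdj x y → pvGood g color n y →
          y ∈ pvBfsLoop g color n fuel q seen) := by
  intro fuel
  induction fuel with
  | zero =>
      intro q seen hnd hin hr hq hcl hfuel
      have hq0 : q = [] := by
        have : q.length = 0 := by omega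
        exact List.length_eq_zero_iff.1 this
      subst hq0
      simp only [pvBfsLoop]
      refine ⟨fun x hx => hx, hnd, hin, hr, ?_⟩
      intro x hx y hadj hg
      rcases hcl x hx with h | h
      · exact h y hadj hg
      · simp at h
  | succ fuel ih =>
      intro q seen hnd hin hr hq hcl hfuel
      match q with
      | [] =>
          simp only [pvBfsLoop]
          refine ⟨fun x hx => hx, hnd, hin, hr, ?_⟩
          intro x hx y hadj hg
          rcases hcl x hx with h | h
          · exact h y hadj hg
          · simp at h
      | (r, c) :: q' =>
          simp only [pvBfsLoop]
          have hinv0 : pvProcInv g color n r c q' seen (q', seen) :=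
            ⟨[], by simp, by simp, by simpa using hnd, by simp⟩
          have hinv := pvFoldProc_inv g color n r c q' seen pvDirsA
            (fun d hd => hd) (q', seen) hinv0
          set st := pvDirsA.foldl (pvBfsProc g color n r c) (q', seen) with hst
          rcases hinv with ⟨l, hl1, hl2, hl3, hl4⟩
          have hrc_seen : (r, c) ∈ seen := hq (r, c) List.mem_cons_self
          have hin2 : ∀ x ∈ st.2, pvInB n x := by
            intro x hx
            rw [hl2] at hx
            rcases List.mem_append.1 hx with hx | hx
            · exact hin x hx
            · exact (hl4 x hx).2.1.1
          have hr2 : ∀ x ∈ st.2, pvReach (pvGood g color n) P x := by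
            intro x hx
            rw [hl2] at hx
            rcases List.mem_append.1 hx with hx | hx
            · exact hr x hx
            · exact pvReach.step (r, c) x (hr (r, c) hrc_seen) (hl4 x hx).2.2 (hl4 x hx).2.1
          have hq2 : ∀ x ∈ st.1, x ∈ st.2 := by
            intro x hx
            rw [hl1] at hx
            rw [hl2]
            rcases List.mem_append.1 hx with hx | hx
            · exact List.mem_append.2 (Or.inl (hq x (List.mem_cons_of_mem _ hx)))
            · exact List.mem_append.2 (Or.inr hx)
          have hcover : ∀ y, pvAdj (r, c) y → pvGood g color n y → y ∈ st.2 := by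
            intro y hadj hg
            rcases (pvAdj_iff_dir r c y).1 hadj with ⟨d, hd, rfl⟩
            exact pvFoldProc_hit g color n r c pvDirsA (q', seen) d hd hg
          have hcl2 : ∀ x ∈ st.2, (∀ y, pvAdj x y → pvGood g color n y → y ∈ st.2) ∨ x ∈ st.1 := by
            intro x hx
            rw [hl2] at hx
            rcases List.mem_append.1 hx with hx | hx
            · by_cases hxrc : x = (r, c)
              · subst hxrc
                exact Or.inl hcover
              · rcases hcl x hx with h | h
                · left
                  intro y hadj hg
                  rw [hl2]
                  exact List.mem_append.2 (Or.inl (h y hadj hg))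
                · rcases List.mem_cons.1 h with h | h
                  · exact absurd h hxrc
                  · right; rw [hl1]; exact List.mem_append.2 (Or.inl h)
            · right; rw [hl1]; exact List.mem_append.2 (Or.inr hx)
          have hcard : st.2.length ≤ n.toNat * n.toNat := pvCardLe (show _root_.List.Nodup _ from by rw [hl2]; exact hl3) hin2
          have hfuel2 : st.1.length + 2 * (n.toNat * n.toNat - st.2.length) ≤ fuel := by
            have e1 : st.1.length = q'.length + l.length := by rw [hl1]; simp
            have e2 : st.2.length = seen.length + l.length := by rw [hl2]; simp
            simp only [List.length_cons] at hfuel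
            omega
          have := ih st.1 st.2 (show _root_.List.Nodup _ from by rw [hl2]; exact hl3) hin2 hr2 hq2 hcl2 hfuel2
          rcases this with ⟨c1, c2, c3, c4, c5⟩
          refine ⟨?_, c2, c3, c4, c5⟩
          intro x hx
          apply c1
          rw [hl2]
          exact List.mem_append.2 (Or.inl hx)

lemma pvBfs_spec (g : List (List Int)) (color n : Int) (seen : List (Int × Int))
    (h0 : seen ≠ []) (hnd : seen.Nodup) (hin : ∀ x ∈ seen, pvInB n x) :
    (∀ x ∈ seen, x ∈ pvBfs g color seen n) ∧ (pvBfs g color seen n).Nodup ∧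
    (∀ x ∈ pvBfs g color seen n, pvInB n x) ∧
    (∀ x, x ∈ pvBfs g color seen n ↔ pvReach (pvGood g color n) (· ∈ seen) x) := by
  have hne : seen.isEmpty = false := by
    simp [List.isEmpty_iff]; exact h0
  have hn0 : 0 ≤ n := by
    rcases List.exists_mem_of_ne_nil seen h0 with ⟨x, hx⟩
    have := hin x hx
    rcases this with ⟨h1, h2, _, _⟩
    omega
  have hfuel : seen.length + 2 * (n.toNat * n.toNat - seen.length) ≤ (3 * n * n).toNat + 1 := by
    have hc : seen.length ≤ n.toNat * n.toNat := pvCardLe hnd hin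
    have h3 : (3 * n * n).toNat = 3 * (n.toNat * n.toNat) := by
      have : (3 : Int) * n * n = ((3 * (n.toNat * n.toNat) : Nat) : Int) := by
        push_cast [Int.toNat_of_nonneg hn0]
        ring
      rw [this, Int.toNat_natCast]
    omega
  have hspec := pvBfsLoop_spec g color n (· ∈ seen) ((3 * n * n).toNat + 1) seen seen
    hnd hin (fun x hx => pvReach.base x hx) (fun x hx => hx)
    (fun x hx => Or.inr hx) hfuel
  rcases hspec with ⟨c1, c2, c3, c4, c5⟩
  have hbfs : pvBfs g color seen n = pvBfsLoop g color n ((3 * n * n).toNat + 1) seen seen := by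
    unfold pvBfs
    rw [hne]
    simp
  rw [hbfs]
  refine ⟨c1, c2, c3, ?_⟩
  intro x
  constructor
  · exact c4 x
  · exact pvReach_subset (fun y hy => c1 y hy) c5 x

-- ---- painting the grid: order and duplicates do not matter ----
def pvGet2? (g : List (List Int)) (i j : Nat) : Option Int := g[i]?.bind (fun row => row[j]?)

lemma pvSet2d_eq (g : List (List Int)) {r c : Int} (v : Int) (hr : 0 ≤ r) (hc : 0 ≤ c) :
    pvSet2d g r c v = g.set r.toNat ((g.getD r.toNat []).set c.toNat v) := by
  unfold pvSet2d
  rw [PySem.List.pySetD_of_nonneg _ _ hc, PySem.List.pySetD_of_nonneg _ _ hr,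
    PySem.List.pyGetD_of_nonneg _ _ hr]

lemma pvSet2d_length (g : List (List Int)) {r c : Int} (v : Int) (hr : 0 ≤ r) (hc : 0 ≤ c) :
    (pvSet2d g r c v).length = g.length := by
  rw [pvSet2d_eq g v hr hc, List.length_set]

lemma pvSet2d_rowlen (g : List (List Int)) {r c : Int} (v : Int) (hr : 0 ≤ r) (hc : 0 ≤ c)
    (i : Nat) : ((pvSet2d g r c v)[i]?).map List.length = (g[i]?).map List.length := by
  rw [pvSet2d_eq g v hr hc]
  by_cases hi : r.toNat = i
  · subst hi
    by_cases hlt : r.toNat < g.length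
    · rw [List.getElem?_set_self hlt, List.getElem?_eq_getElem hlt,
        List.getD_eq_getElem _ _ hlt]
      simp
    · rw [List.getElem?_set]
      simp only [if_neg hlt]
      rw [List.getElem?_eq_none (by omega)]
      simp
  · rw [List.getElem?_set_ne hi]

lemma pvGet2?_set2d (g : List (List Int)) {r c : Int} (v : Int) (hr : 0 ≤ r) (hc : 0 ≤ c)
    (i j : Nat) :
    pvGet2? (pvSet2d g r c v) i j =
      if i = r.toNat ∧ j = c.toNat ∧ (pvGet2? g i j).isSome then some v else pvGet2? g i j := by
  rw [pvSet2d_eq g v hr hc]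
  unfold pvGet2?
  by_cases hi : r.toNat = i
  · subst hi
    by_cases hlt : r.toNat < g.length
    · rw [List.getElem?_set_self hlt, List.getElem?_eq_getElem hlt,
        List.getD_eq_getElem _ _ hlt]
      simp only [Option.bind_some]
      by_cases hj : c.toNat = j
      · subst hj
        by_cases hjl : c.toNat < (g[r.toNat]).length
        · rw [List.getElem?_set_self hjl, List.getElem?_eq_getElem hjl]
          simp
        · rw [List.getElem?_set]
          simp only [if_neg hjl]
          rw [List.getElem?_eq_none (by omega)]
          simp
      · rw [List.getElem?_set_ne hj, if_neg (by intro h; exact hj h.2.1.symm)]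
    · rw [List.getElem?_set]
      simp only [if_neg hlt]
      rw [List.getElem?_eq_none (by omega)]
      simp
  · rw [List.getElem?_set_ne hi, if_neg (by intro h; exact hi h.1.symm)]

lemma pvGet2?_set2d_isSome (g : List (List Int)) {r c : Int} (v : Int) (hr : 0 ≤ r)
    (hc : 0 ≤ c) (i j : Nat) :
    (pvGet2? (pvSet2d g r c v) i j).isSome = (pvGet2? g i j).isSome := by
  rw [pvGet2?_set2d g v hr hc]
  split_ifs with h
  · simp [h.2.2]
  · rfl

lemma pvPaint_get2? (v : Int) :
    ∀ (l : List (Int × Int)) (g : List (List Int)),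
      (∀ x ∈ l, 0 ≤ x.1 ∧ 0 ≤ x.2) → ∀ (i j : Nat),
      pvGet2? (pvPaint g l v) i j =
        if (((i : Int), (j : Int)) ∈ l ∧ (pvGet2? g i j).isSome) then some v
        else pvGet2? g i j := by
  intro l
  induction l with
  | nil => intro g _ i j; simp [pvPaint]
  | cons x t ih =>
      intro g hpos i j
      have hx := hpos x List.mem_cons_self
      have hstep : pvPaint g (x :: t) v = pvPaint (pvSet2d g x.1 x.2 v) t v := rfl
      rw [hstep, ih _ (fun y hy => hpos y (List.mem_cons_of_mem _ hy)) i j]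
      rw [pvGet2?_set2d_isSome g v hx.1 hx.2 i j,
        pvGet2?_set2d g v hx.1 hx.2 i j]
      have hcoord : (((i : Int), (j : Int)) = x) ↔ (i = x.1.toNat ∧ j = x.2.toNat) := by
        rcases x with ⟨a, b⟩
        simp only [Prod.mk.injEq]
        omega
      by_cases hsome : (pvGet2? g i j).isSome = true
      · by_cases hmemt : ((i : Int), (j : Int)) ∈ t
        · rw [if_pos ⟨hmemt, hsome⟩, if_pos ⟨List.mem_cons.2 (Or.inr hmemt), hsome⟩]
        · by_cases hx' : ((i : Int), (j : Int)) = x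
          · obtain ⟨h1, h2⟩ := hcoord.1 hx'
            rw [if_neg (fun hh => hmemt hh.1), if_pos ⟨h1, h2, hsome⟩,
              if_pos ⟨List.mem_cons.2 (Or.inl hx'), hsome⟩]
          · have hno : ¬(i = x.1.toNat ∧ j = x.2.toNat ∧ (pvGet2? g i j).isSome = true) :=
              fun hh => hx' (hcoord.2 ⟨hh.1, hh.2.1⟩)
            rw [if_neg (fun hh => hmemt hh.1), if_neg hno,
              if_neg (fun hh => (List.mem_cons.1 hh.1).elim hx' hmemt)]
      · simp [hsome]

lemma pvPaint_length (v : Int) :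
    ∀ (l : List (Int × Int)) (g : List (List Int)), (∀ x ∈ l, 0 ≤ x.1 ∧ 0 ≤ x.2) →
      (pvPaint g l v).length = g.length := by
  intro l
  induction l with
  | nil => intro g _; rfl
  | cons x t ih =>
      intro g hpos
      have hx := hpos x List.mem_cons_self
      have hstep : pvPaint g (x :: t) v = pvPaint (pvSet2d g x.1 x.2 v) t v := rfl
      rw [hstep, ih _ (fun y hy => hpos y (List.mem_cons_of_mem _ hy)),
        pvSet2d_length g v hx.1 hx.2]

lemma pvPaint_rowlen (v : Int) :
    ∀ (l : List (Int × Int)) (g : List (List Int)), (∀ x ∈ l, 0 ≤ x.1 ∧ 0 ≤ x.2) →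
      ∀ (i : Nat), ((pvPaint g l v)[i]?).map List.length = (g[i]?).map List.length := by
  intro l
  induction l with
  | nil => intro g _ i; rfl
  | cons x t ih =>
      intro g hpos i
      have hx := hpos x List.mem_cons_self
      have hstep : pvPaint g (x :: t) v = pvPaint (pvSet2d g x.1 x.2 v) t v := rfl
      rw [hstep, ih _ (fun y hy => hpos y (List.mem_cons_of_mem _ hy)),
        pvSet2d_rowlen g v hx.1 hx.2]

lemma pvGridExt (g₁ g₂ : List (List Int)) (hlen : g₁.length = g₂.length)
    (hrow : ∀ i : Nat, (g₁[i]?).map List.length = (g₂[i]?).map List.length)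
    (hget : ∀ i j : Nat, pvGet2? g₁ i j = pvGet2? g₂ i j) : g₁ = g₂ := by
  apply List.ext_getElem?
  intro i
  rcases h1 : g₁[i]? with _ | r1
  · have : g₁.length ≤ i := by
      by_contra hcon
      rw [List.getElem?_eq_getElem (by omega)] at h1
      simp at h1
    rw [List.getElem?_eq_none (by omega)]
  · rcases h2 : g₂[i]? with _ | r2
    · have := hrow i
      rw [h1, h2] at this
      simp at this
    · have hrl : r1.length = r2.length := by
        have := hrow i
        rw [h1, h2] at this
        simpa using this
      have : r1 = r2 := by
        apply List.ext_getElem?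
        intro j
        have := hget i j
        unfold pvGet2? at this
        rw [h1, h2] at this
        simpa using this
      rw [this]

-- painting again with a superset overrides the first paint completely
lemma pvPaint_paint (g : List (List Int)) (l₁ l₂ : List (Int × Int)) (v₁ v₂ : Int)
    (h₁ : ∀ x ∈ l₁, 0 ≤ x.1 ∧ 0 ≤ x.2) (h₂ : ∀ x ∈ l₂, 0 ≤ x.1 ∧ 0 ≤ x.2)
    (hsub : ∀ x ∈ l₁, x ∈ l₂) :
    pvPaint (pvPaint g l₁ v₁) l₂ v₂ = pvPaint g l₂ v₂ := by
  apply pvGridExt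
  · rw [pvPaint_length v₂ l₂ _ h₂, pvPaint_length v₂ l₂ g h₂, pvPaint_length v₁ l₁ g h₁]
  · intro i
    rw [pvPaint_rowlen v₂ l₂ _ h₂ i, pvPaint_rowlen v₂ l₂ g h₂ i, pvPaint_rowlen v₁ l₁ g h₁ i]
  · intro i j
    have hS : (pvGet2? (pvPaint g l₁ v₁) i j).isSome = (pvGet2? g i j).isSome := by
      rw [pvPaint_get2? v₁ l₁ g h₁ i j]
      split_ifs with h
      · simp [h.2]
      · rfl
    rw [pvPaint_get2? v₂ l₂ _ h₂ i j, pvPaint_get2? v₂ l₂ g h₂ i j, hS,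
      pvPaint_get2? v₁ l₁ g h₁ i j]
    split_ifs with hA hB
    · rfl
    · exact absurd ⟨hsub _ hB.1, hB.2⟩ hA
    · rfl

-- shape of an n×n grid, and the bridge between pvAt and pvGet2?
def pvShape (g : List (List Int)) (n : Int) : Prop :=
  (g.length : Int) = n ∧ ∀ row ∈ g, (row.length : Int) = n

lemma pvShape_paint {g : List (List Int)} {n : Int} (h : pvShape g n)
    (l : List (Int × Int)) (v : Int) (hl : ∀ x ∈ l, 0 ≤ x.1 ∧ 0 ≤ x.2) :
    pvShape (pvPaint g l v) n := by
  constructor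
  · rw [pvPaint_length v l g hl]; exact h.1
  · intro row hrow
    obtain ⟨i, hi, hrow'⟩ := List.getElem_of_mem hrow
    have := pvPaint_rowlen v l g hl i
    rw [List.getElem?_eq_getElem hi, hrow'] at this
    have hi' : i < g.length := by
      have := pvPaint_length v l g hl
      omega
    rw [List.getElem?_eq_getElem hi'] at this
    simp only [Option.map_some, Option.some.injEq] at this
    rw [this]
    exact h.2 _ (List.getElem_mem hi')

lemma pvAt_get2 {g : List (List Int)} {n : Int} (hs : pvShape g n) {x : Int × Int}
    (hx : pvInB n x) : pvGet2? g x.1.toNat x.2.toNat = some (pvAt g x.1 x.2) := by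
  obtain ⟨h1, h2, h3, h4⟩ := hx
  have hr : x.1.toNat < g.length := by
    have := hs.1
    omega
  have hrow : (g[x.1.toNat].length : Int) = n := hs.2 _ (List.getElem_mem hr)
  have hcl : x.2.toNat < (g[x.1.toNat]).length := by omega
  unfold pvGet2? pvAt
  rw [PySem.List.pyGetD_of_nonneg _ _ h1, PySem.List.pyGetD_of_nonneg _ _ h3,
    List.getElem?_eq_getElem hr]
  simp only [Option.bind_some]
  rw [List.getElem?_eq_getElem hcl, List.getD_eq_getElem _ _ hr,
    List.getD_eq_getElem _ _ hcl]

lemma pvAt_paint {g : List (List Int)} {n : Int} (hs : pvShape g n)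
    (l : List (Int × Int)) (v : Int) (hl : ∀ x ∈ l, 0 ≤ x.1 ∧ 0 ≤ x.2)
    {x : Int × Int} (hx : pvInB n x) :
    pvAt (pvPaint g l v) x.1 x.2 = if x ∈ l then v else pvAt g x.1 x.2 := by
  have h1 := pvAt_get2 (pvShape_paint hs l v hl) hx
  have h2 := pvAt_get2 hs hx
  have h3 := pvPaint_get2? v l g hl x.1.toNat x.2.toNat
  have hxx : ((x.1.toNat : Int), (x.2.toNat : Int)) = x := by
    obtain ⟨a, b⟩ := x
    obtain ⟨u1, _, u3, _⟩ := hx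
    simp only [Prod.mk.injEq]
    omega
  rw [hxx] at h3
  by_cases hm : x ∈ l
  · rw [if_pos hm] at *
    rw [h1, h2] at h3
    rw [if_pos ⟨hm, by simp⟩] at h3
    simp at h3
    exact h3
  · rw [if_neg hm] at *
    rw [h1, h2, if_neg (fun hh => hm hh.1)] at h3
    simpa using h3

-- ---- selection: A's sorted(...)[0] vs B's running maximum ----
def pvLex (a b : Int × List (Int × Int)) : Bool :=
  decide ((-(a.2.length : Int)) < (-(b.2.length : Int))) ||
    (!decide ((-(b.2.length : Int)) < (-(a.2.length : Int))) && decide (a.1 < b.1))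

lemma pvSorted2_eq (ns : List (Int × List (Int × Int))) :
    PySem.List.sorted2 ns (fun x => -(x.2.length : Int)) (fun x => x.1)
      = ns.foldl (fun acc x => PySem.List.insertBy pvLex x acc) [] := rfl

lemma pvLex_iff (a b : Int × List (Int × Int)) :
    pvLex a b = true ↔
      (b.2.length < a.2.length ∨ (a.2.length = b.2.length ∧ a.1 < b.1)) := by
  simp only [pvLex, Bool.or_eq_true, Bool.and_eq_true, Bool.not_eq_true',
    decide_eq_true_eq, decide_eq_false_iff_not]
  omega

lemma pvLex_false_iff (a b : Int × List (Int × Int)) :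
    pvLex a b = false ↔
      ¬(b.2.length < a.2.length ∨ (a.2.length = b.2.length ∧ a.1 < b.1)) := by
  rw [← pvLex_iff]
  cases h : pvLex a b
  · simp [h]
  · simp [h]

lemma pvInsertBy_pairwise (x : Int × List (Int × Int)) (l : List (Int × List (Int × Int)))
    (hl : l.Pairwise (fun a b => pvLex b a = false)) :
    (PySem.List.insertBy pvLex x l).Pairwise (fun a b => pvLex b a = false) := by
  induction l with
  | nil =>
      simp [show PySem.List.insertBy pvLex x [] = [x] from rfl]
  | cons y ys ih =>
      rw [List.pairwise_cons] at hl
      rw [show PySem.List.insertBy pvLex x (y :: ys)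
        = if pvLex x y then x :: y :: ys else y :: PySem.List.insertBy pvLex x ys from rfl]
      split_ifs with hxy
      · refine List.pairwise_cons.2 ⟨?_, List.pairwise_cons.2 ⟨hl.1, hl.2⟩⟩
        intro z hz
        rcases List.mem_cons.1 hz with rfl | hz'
        · rw [pvLex_false_iff]
          rw [pvLex_iff] at hxy
          omega
        · have h1 := hl.1 z hz'
          rw [pvLex_false_iff] at h1 ⊢
          rw [pvLex_iff] at hxy
          omega
      · refine List.pairwise_cons.2 ⟨?_, ih hl.2⟩
        intro z hz
        rcases (PySem.List.mem_insertBy pvLex x z _).1 hz with rfl | hz'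
        · cases h : pvLex z y
          · rfl
          · exact absurd h (by simp [hxy])
        · exact hl.1 z hz'

lemma pvSorted2_pairwise (ns : List (Int × List (Int × Int))) :
    (PySem.List.sorted2 ns (fun x => -(x.2.length : Int)) (fun x => x.1)).Pairwise
      (fun a b => pvLex b a = false) := by
  rw [pvSorted2_eq]
  have : ∀ (l acc : List (Int × List (Int × Int))),
      acc.Pairwise (fun a b => pvLex b a = false) →
      (l.foldl (fun acc x => PySem.List.insertBy pvLex x acc) acc).Pairwise
        (fun a b => pvLex b a = false) := by
    intro l
    induction l with
    | nil => intro acc h; exact h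
    | cons x t ih => intro acc h; exact ih _ (pvInsertBy_pairwise x acc h)
  exact this ns [] (by simp)

lemma pvHead_min (ns : List (Int × List (Int × Int))) (m : Int × List (Int × Int))
    (t : List (Int × List (Int × Int)))
    (h : PySem.List.sorted2 ns (fun x => -(x.2.length : Int)) (fun x => x.1) = m :: t) :
    m ∈ ns ∧ ∀ y ∈ ns, pvLex y m = false := by
  have hperm := PySem.List.sorted2_perm ns (fun x => -(x.2.length : Int)) (fun x => x.1) false
  rw [h] at hperm
  constructor
  · exact hperm.mem_iff.1 List.mem_cons_self
  · intro y hy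
    have hy' : y ∈ m :: t := hperm.mem_iff.2 hy
    rcases List.mem_cons.1 hy' with rfl | hy''
    · rw [pvLex_false_iff]; omega
    · have hp := pvSorted2_pairwise ns
      rw [h, List.pairwise_cons] at hp
      exact hp.1 y hy''

-- ---- B's running-max fold over (gain, colour) pairs ----
lemma pvBestFoldB (gain : Int → Int) :
    ∀ (cs : List Int) (b : Int × Int),
      b.1 = gain b.2 → (∀ c ∈ cs, b.2 < c) → cs.Pairwise (· < ·) →
      ∃ b', cs.foldl (fun best color =>
          match best with
          | none => some (gain color, color)
          | some bb => if bb.1 < gain color then some (gain color, color) else best)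
          (some b) = some b' ∧
        b'.1 = gain b'.2 ∧ (b' = b ∨ b'.2 ∈ cs) ∧ b.1 ≤ b'.1 ∧
        (b'.2 ≠ b.2 → b.1 < b'.1) ∧
        (∀ c ∈ cs, c = b'.2 ∨ gain c < b'.1 ∨ (gain c = b'.1 ∧ b'.2 < c)) := by
  intro cs
  induction cs with
  | nil =>
      intro b hb _ _
      exact ⟨b, rfl, hb, Or.inl rfl, le_refl _, fun h => absurd rfl h, by simp⟩
  | cons c rest ih =>
      intro b hb hlt hp
      rw [List.pairwise_cons] at hp
      by_cases hcase : b.1 < gain c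
      · rcases ih (gain c, c) rfl (fun c' hc' => hp.1 c' hc') hp.2 with
          ⟨b', hb'1, hb'2, hb'3, hb'4, hb'5, hb'6⟩
        refine ⟨b', by rw [List.foldl_cons]; simpa [hcase] using hb'1, hb'2, ?_, ?_, ?_, ?_⟩
        · rcases hb'3 with rfl | hmem
          · exact Or.inr List.mem_cons_self
          · exact Or.inr (List.mem_cons_of_mem _ hmem)
        · simp only at hb'4
          omega
        · intro _
          simp only at hb'4
          omega
        · intro c' hc'
          rcases List.mem_cons.1 hc' with rfl | hc''
          · rcases hb'3 with rfl | hmem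
            · exact Or.inl rfl
            · have hne : b'.2 ≠ c' := by
                intro hh
                have := hp.1 b'.2 hmem
                omega
              have := hb'5 hne
              simp only at this hb'4
              right; left; omega
          · exact hb'6 c' hc''
      · rcases ih b hb (fun c' hc' => lt_trans (hlt c List.mem_cons_self) (hp.1 c' hc')) hp.2 with
          ⟨b', hb'1, hb'2, hb'3, hb'4, hb'5, hb'6⟩
        refine ⟨b', by rw [List.foldl_cons]; simpa [hcase] using hb'1, hb'2, ?_, hb'4, hb'5, ?_⟩
        · rcases hb'3 with rfl | hmem
          · exact Or.inl rfl
          · exact Or.inr (List.mem_cons_of_mem _ hmem)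
        · intro c' hc'
          rcases List.mem_cons.1 hc' with rfl | hc''
          · by_cases heq : b'.2 = b.2
            · by_cases hlen : gain c' = b'.1
              · right; right
                refine ⟨hlen, ?_⟩
                rw [heq]
                exact hlt c' List.mem_cons_self
              · right; left
                have : b.1 ≤ b'.1 := hb'4
                omega
            · have := hb'5 heq
              right; left
              omega
          · exact hb'6 c' hc''

-- ---- the two if-guarded folds over range(1, 7) ----
lemma pvFoldl_append_if (c0 : Int) (f : Int → Int × List (Int × Int)) :
    ∀ (l : List Int) (acc : List (Int × List (Int × Int))),
      l.foldl (fun acc x => if x ≠ c0 then acc ++ [f x] else acc) acc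
        = acc ++ (l.filter (fun x => x ≠ c0)).map f := by
  intro l
  induction l with
  | nil => intro acc; simp
  | cons x t ih =>
      intro acc
      by_cases hx : x = c0
      · subst hx
        simp only [List.foldl_cons, if_neg (not_not_intro rfl)]
        rw [ih]
        simp
      · simp only [List.foldl_cons, if_pos hx]
        rw [ih]
        simp [hx]

lemma pvFoldl_step_if {σ : Type} (c0 : Int) (f' : σ → Int → σ) :
    ∀ (l : List Int) (acc : σ),
      l.foldl (fun acc x => if x ≠ c0 then f' acc x else acc) acc
        = (l.filter (fun x => x ≠ c0)).foldl f' acc := by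
  intro l
  induction l with
  | nil => intro acc; simp
  | cons x t ih =>
      intro acc
      by_cases hx : x = c0
      · subst hx
        simp only [List.foldl_cons, if_neg (not_not_intro rfl)]
        rw [ih]
        simp
      · simp only [List.foldl_cons, if_pos hx]
        rw [ih]
        simp [hx]

lemma pvCs_mem (c0 c : Int) :
    c ∈ (PySem.List.pyRange 1 7).filter (fun x => x ≠ c0) ↔ (1 ≤ c ∧ c < 7 ∧ c ≠ c0) := by
  simp [List.mem_filter, PySem.List.mem_pyRange_one]
  tauto

lemma pvCs_pairwise (c0 : Int) :
    ((PySem.List.pyRange 1 7).filter (fun x => x ≠ c0)).Pairwise (· < ·) :=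
  List.Pairwise.filter _ (PySem.List.pairwise_lt_pyRange_one 1 7)

lemma pvCs_ne (c0 : Int) : (PySem.List.pyRange 1 7).filter (fun x => x ≠ c0) ≠ [] := by
  by_cases h : c0 = 1
  · exact List.ne_nil_of_mem ((pvCs_mem c0 2).2 ⟨by norm_num, by norm_num, by omega⟩)
  · exact List.ne_nil_of_mem ((pvCs_mem c0 1).2 ⟨by norm_num, by norm_num, by omega⟩)

-- ---- the move counter ----
def pvCountsOf (chosen : List Int) : PySem.Dict Int Int :=
  ⟨[(1, (PySem.List.count chosen 1 : Int)), (2, (PySem.List.count chosen 2 : Int)),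
    (3, (PySem.List.count chosen 3 : Int)), (4, (PySem.List.count chosen 4 : Int)),
    (5, (PySem.List.count chosen 5 : Int)), (6, (PySem.List.count chosen 6 : Int))]⟩

lemma pvCountsA0_eq : pvCountsA0 = pvCountsOf [] := rfl

lemma pvCounts_insert (chosen : List Int) (k : Int) (h1 : 1 ≤ k) (h7 : k < 7) :
    (pvCountsOf chosen).insert k ((pvCountsOf chosen).getD k 0 + 1)
      = pvCountsOf (chosen ++ [k]) := by
  interval_cases k <;>
    simp [pvCountsOf, PySem.Dict.insert, PySem.Dict.getD, PySem.Dict.get?,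
      PySem.Dict.contains, PySem.List.count, List.count_append]

lemma pvOutB_eq (chosen : List Int) :
    pvOutB chosen = ((chosen.length : Int), (pvCountsOf chosen).items) := by
  have h17 : PySem.List.pyRange 1 7 = [1, 2, 3, 4, 5, 6] := by decide
  unfold pvOutB pvCountsOf
  rw [h17]
  simp [PySem.Dict.insert, PySem.Dict.contains]

-- ---- one unfolding step of each solve loop ----
lemma pvSolveLoopA_succ (n : Int) (fuel : Nat) (g : List (List Int)) (seen : List (Int × Int))
    (counts : PySem.Dict Int Int) (moves : Int) :
    pvSolveLoopA n (fuel + 1) g seen counts moves =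
      if (seen.length : Int) < n * n then
        match PySem.List.sorted2
            ((PySem.List.pyRange 1 7).foldl
              (fun acc color => if color ≠ pvAt g 0 0 then
                  acc ++ [(color, pvBfs g color (pvBfs g (pvAt g 0 0) seen n) n)] else acc)
              ([] : List (Int × List (Int × Int))))
            (fun x => -(x.2.length : Int)) (fun x => x.1) with
        | [] => (moves, counts.items)
        | (color, seen') :: _ =>
            pvSolveLoopA n fuel (pvPaint g seen' color) seen'
              (counts.insert color (counts.getD color 0 + 1)) (moves + 1)
      else (moves, counts.items) := rfl

-- ---- B-side: cells carrying a given component value ----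
def pvCells (comp : PySem.Dict (Int × Int) Int) (p : Int → Bool) : List (Int × Int) :=
  (comp.items.filter (fun e => p e.2)).map (·.1)

lemma pvCells_nodup (comp : PySem.Dict (Int × Int) Int) (h : comp.keys.Nodup)
    (p : Int → Bool) : (pvCells comp p).Nodup := by
  have hsub : List.Sublist (pvCells comp p) (comp.items.map (·.1)) :=
    List.Sublist.map _ List.filter_sublist
  have hk : comp.keys = comp.items.map (·.1) := rfl
  exact List.Nodup.sublist hsub (hk ▸ h)

lemma pvMem_cells (comp : PySem.Dict (Int × Int) Int) (h : comp.keys.Nodup)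
    (p : Int → Bool) (x : Int × Int) :
    x ∈ pvCells comp p ↔ ∃ k, comp.get? x = some k ∧ p k = true := by
  unfold pvCells
  simp only [List.mem_map, List.mem_filter]
  constructor
  · rintro ⟨⟨a, b⟩, ⟨he, hp⟩, rfl⟩
    exact ⟨b, PySem.Dict.get?_of_mem_items _ he h, hp⟩
  · rintro ⟨k, hk, hp⟩
    exact ⟨(x, k), ⟨PySem.Dict.mem_items_of_get?_eq_some _ hk, hp⟩, rfl⟩

lemma pvCells_congr (comp : PySem.Dict (Int × Int) Int) (p q : Int → Bool)
    (h : ∀ k, p k = q k) : pvCells comp p = pvCells comp q := by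
  unfold pvCells
  rw [List.filter_congr (fun e _ => by rw [h])]

lemma pvLength_filter_or (p q : Int → Bool)
    (hdis : ∀ k, ¬(p k = true ∧ q k = true)) :
    ∀ (l : List ((Int × Int) × Int)),
      (l.filter (fun e => p e.2 || q e.2)).length
        = (l.filter (fun e => p e.2)).length + (l.filter (fun e => q e.2)).length := by
  intro l
  induction l with
  | nil => simp
  | cons e t ih =>
      by_cases hp : p e.2 = true
      · have hq : q e.2 = false := by
          cases hq : q e.2
          · rfl
          · exact absurd ⟨hp, hq⟩ (hdis e.2)
        simp [List.filter_cons, hp, hq, ih]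
        omega
      · have hp' : p e.2 = false := by simpa using hp
        cases hq : q e.2 <;> simp [List.filter_cons, hp', hq, ih] <;> omega

lemma pvCells_length_or (comp : PySem.Dict (Int × Int) Int) (p q : Int → Bool)
    (hdis : ∀ k, ¬(p k = true ∧ q k = true)) :
    (pvCells comp (fun k => p k || q k)).length
      = (pvCells comp p).length + (pvCells comp q).length := by
  unfold pvCells
  simp only [List.length_map]
  exact pvLength_filter_or p q hdis _

lemma pvBeqDecide (v k : Int) : (v == k) = decide (v = k) := by
  by_cases h : v = k <;> simp [h]

lemma pvCells_length_sum (comp : PySem.Dict (Int × Int) Int) :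
    ∀ (l : List Int), l.Nodup →
      ((l.map (fun k => ((pvCells comp (fun v => decide (v = k))).length : Int))).sum)
        = ((pvCells comp (fun v => decide (v ∈ l))).length : Int) := by
  intro l
  induction l with
  | nil =>
      intro _
      simp only [List.map_nil, List.sum_nil]
      have h0 : pvCells comp (fun v => decide (v ∈ ([] : List Int))) = [] := by
        unfold pvCells
        rw [List.filter_congr (fun e _ => by simp : ∀ e ∈ comp.items,
          (decide (e.2 ∈ ([] : List Int))) = false)]
        simp
      rw [h0]
      simp
  | cons k t ih =>
      intro hnd
      rw [List.nodup_cons] at hnd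
      have hco : pvCells comp (fun v => decide (v ∈ k :: t))
          = pvCells comp (fun v => decide (v = k) || decide (v ∈ t)) := by
        apply pvCells_congr
        intro v
        simp [List.mem_cons, pvBeqDecide]
      rw [List.map_cons, List.sum_cons, ih hnd.2, hco,
        pvCells_length_or comp (fun v => decide (v = k)) (fun v => decide (v ∈ t))
          (by rintro v ⟨h1, h2⟩; simp at h1 h2; exact hnd.1 (h1 ▸ h2))]
      push_cast
      ring

-- ---- B-side: the labelling DFS ----
lemma pvAdj_iff_dirB (r c : Int) (y : Int × Int) :
    pvAdj (r, c) y ↔ ∃ d ∈ pvDirsB, y = (r + d.1, c + d.2) := by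
  constructor
  · rintro (rfl | rfl | rfl | rfl)
    · exact ⟨(0, 1), by simp [pvDirsB], by simp⟩
    · exact ⟨(0, -1), by simp [pvDirsB], by simp [sub_eq_add_neg]⟩
    · exact ⟨(1, 0), by simp [pvDirsB], by simp⟩
    · exact ⟨(-1, 0), by simp [pvDirsB], by simp [sub_eq_add_neg]⟩
  · rintro ⟨d, hd, rfl⟩
    fin_cases hd <;> simp [pvAdj, sub_eq_add_neg]

-- preservation of lookups when the item list is extended on the right
lemma pvGet?_of_prefix {d e : PySem.Dict (Int × Int) Int} {l : List ((Int × Int) × Int)}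
    (hitems : e.items = d.items ++ l) (hnd : e.keys.Nodup) (hd : d.keys.Nodup)
    {x : Int × Int} {v : Int} (h : d.get? x = some v) : e.get? x = some v :=
  PySem.Dict.get?_of_mem_items _
    (by rw [hitems]
        exact List.mem_append.2 (Or.inl (PySem.Dict.mem_items_of_get?_eq_some _ h))) hnd

lemma pvGet?_of_prefix' {d e : PySem.Dict (Int × Int) Int} {l : List ((Int × Int) × Int)}
    (hitems : e.items = d.items ++ l) (hnd : e.keys.Nodup) (hd : d.keys.Nodup)
    {x : Int × Int} {v : Int} (h : e.get? x = some v) :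
    d.get? x = some v ∨ (x, v) ∈ l := by
  have hmem := PySem.Dict.mem_items_of_get?_eq_some _ h
  rw [hitems] at hmem
  rcases List.mem_append.1 hmem with hm | hm
  · exact Or.inl (PySem.Dict.get?_of_mem_items _ hm hd)
  · exact Or.inr hm

-- the state invariant of the labelling DFS, relative to the dict d0 before the seed
def pvLabJ (g : List (List Int)) (col n cid : Int) (d0 : PySem.Dict (Int × Int) Int)
    (x0 : Int × Int) (comp : PySem.Dict (Int × Int) Int) (stack : List (Int × Int))
    (size : Int) : Prop :=
  comp.keys.Nodup ∧
  (∃ lnew : List ((Int × Int) × Int), comp.items = d0.items ++ lnew ∧ ∀ e ∈ lnew, e.2 = cid) ∧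
  (∀ x, comp.get? x = some cid → pvReach (pvGood g col n) (fun z => z = x0) x) ∧
  (∀ y ∈ stack, comp.get? y = some cid) ∧
  (∀ x, comp.get? x = some cid →
      x ∈ stack ∨ (∀ y, pvAdj x y → pvGood g col n y → comp.contains y = true)) ∧
  size = ((pvCells comp (fun v => decide (v = cid))).length : Int)

lemma pvLabelFold_contains_mono (g : List (List Int)) (col n cid r c : Int) :
    ∀ (ds : List (Int × Int)) (st : PySem.Dict (Int × Int) Int × List (Int × Int) × Int)
      (z : Int × Int), st.1.contains z = true →
      ((ds.foldl (pvLabelStep g col n cid r c) st).1).contains z = true := by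
  intro ds
  induction ds with
  | nil => intro st z hz; exact hz
  | cons d ds ih =>
      intro st z hz
      simp only [List.foldl_cons]
      apply ih
      unfold pvLabelStep
      split_ifs with h
      · simp only
        rw [PySem.Dict.contains_insert]
        simp [hz]
      · exact hz

-- one pop of the DFS: the fold over the four directions
lemma pvLabelStep_fold (g : List (List Int)) (col n cid r c : Int) :
    ∀ (ds : List (Int × Int)) (comp : PySem.Dict (Int × Int) Int)
      (stack : List (Int × Int)) (size : Int),
      comp.keys.Nodup →
      size = ((pvCells comp (fun v => decide (v = cid))).length : Int) →
      (let st := ds.foldl (pvLabelStep g col n cid r c) (comp, stack, size)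
       ∃ l : List (Int × Int),
         st.1.items = comp.items ++ l.map (fun y => (y, cid)) ∧
         st.2.1 = l.reverse ++ stack ∧
         st.2.2 = size + l.length ∧
         (∀ y ∈ l, pvGood g col n y ∧ (∃ d ∈ ds, y = (r + d.1, c + d.2)) ∧
            comp.contains y = false) ∧
         st.1.keys.Nodup ∧
         st.2.2 = ((pvCells st.1 (fun v => decide (v = cid))).length : Int) ∧
         (∀ d ∈ ds, pvGood g col n (r + d.1, c + d.2) →
            st.1.contains (r + d.1, c + d.2) = true)) := by
  intro ds
  induction ds with
  | nil =>
      intro comp stack size hnd hsz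
      exact ⟨[], by simp, by simp, by simp, by simp, hnd, by simpa using hsz, by simp⟩
  | cons d ds ih =>
      intro comp stack size hnd hsz
      simp only [List.foldl_cons]
      by_cases hacc : 0 ≤ r + d.1 ∧ r + d.1 < n ∧ 0 ≤ c + d.2 ∧ c + d.2 < n ∧
          ¬ (comp.contains (r + d.1, c + d.2)) ∧ pvAt g (r + d.1) (c + d.2) = col
      · have hstep : pvLabelStep g col n cid r c (comp, stack, size) d
            = (comp.insert (r + d.1, c + d.2) cid, (r + d.1, c + d.2) :: stack, size + 1) := by
          unfold pvLabelStep
          rw [if_pos hacc]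
        rw [hstep]
        have hnc : comp.contains (r + d.1, c + d.2) = false := by
          cases h : comp.contains (r + d.1, c + d.2)
          · rfl
          · exact absurd h (by simpa using hacc.2.2.2.2.1)
        have hitems : (comp.insert (r + d.1, c + d.2) cid).items
            = comp.items ++ [((r + d.1, c + d.2), cid)] :=
          PySem.Dict.items_insert_of_not_contains _ _ hnc
        have hnd' : (comp.insert (r + d.1, c + d.2) cid).keys.Nodup :=
          PySem.Dict.nodup_keys_insert _ _ _ hnd
        have hsz' : size + 1
            = ((pvCells (comp.insert (r + d.1, c + d.2) cid) (fun v => decide (v = cid))).length : Int) := by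
          unfold pvCells
          rw [hitems, List.filter_append]
          simp only [List.filter_cons]
          rw [hsz]
          unfold pvCells
          simp
        obtain ⟨l, e1, e2, e3, e4, e5, e6, e7⟩ :=
          ih (comp.insert (r + d.1, c + d.2) cid) ((r + d.1, c + d.2) :: stack) (size + 1)
            hnd' hsz'
        refine ⟨(r + d.1, c + d.2) :: l, ?_, ?_, ?_, ?_, e5, e6, ?_⟩
        · rw [e1, hitems]
          simp
        · rw [e2]
          simp
        · rw [e3]
          simp only [List.length_cons]
          push_cast
          ring
        · intro y hy
          rcases List.mem_cons.1 hy with hy | hy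
          · subst hy
            exact ⟨⟨⟨hacc.1, hacc.2.1, hacc.2.2.1, hacc.2.2.2.1⟩, hacc.2.2.2.2.2⟩,
              ⟨d, List.mem_cons_self, rfl⟩, hnc⟩
          · obtain ⟨hg, ⟨d', hd', he⟩, hc⟩ := e4 y hy
            refine ⟨hg, ⟨d', List.mem_cons_of_mem _ hd', he⟩, ?_⟩
            rw [PySem.Dict.contains_insert] at hc
            simpa using (Bool.or_eq_false_iff.1 hc).2
        · intro d' hd' hg
          rcases List.mem_cons.1 hd' with rfl | hd''
          · exact pvLabelFold_contains_mono g col n cid r c ds _ _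
              (PySem.Dict.contains_insert_self _ _ _)
          · exact e7 d' hd'' hg
      · have hstep : pvLabelStep g col n cid r c (comp, stack, size) d = (comp, stack, size) := by
          unfold pvLabelStep
          rw [if_neg hacc]
        rw [hstep]
        obtain ⟨l, e1, e2, e3, e4, e5, e6, e7⟩ := ih comp stack size hnd hsz
        refine ⟨l, e1, e2, e3, ?_, e5, e6, ?_⟩
        · intro y hy
          obtain ⟨hg, ⟨d', hd', he⟩, hc⟩ := e4 y hy
          exact ⟨hg, ⟨d', List.mem_cons_of_mem _ hd', he⟩, hc⟩
        · intro d' hd' hg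
          rcases List.mem_cons.1 hd' with rfl | hd''
          · -- rejected direction: since it is good, the cell is already labelled
            have hc : comp.contains (r + d'.1, c + d'.2) = true := by
              by_contra hc
              exact hacc ⟨hg.1.1, hg.1.2.1, hg.1.2.2.1, hg.1.2.2.2,
                by simpa using hc, hg.2⟩
            exact pvLabelFold_contains_mono g col n cid r c ds _ _ hc
          · exact e7 d' hd'' hg

lemma pvContains_of_prefix {d e : PySem.Dict (Int × Int) Int} {l : List ((Int × Int) × Int)}
    (hitems : e.items = d.items ++ l) {x : Int × Int} (h : d.contains x = true) :
    e.contains x = true := by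
  have hk : e.keys = d.keys ++ l.map (·.1) := by
    simp only [PySem.Dict.keys]
    rw [hitems]
    simp
  rw [PySem.Dict.contains_iff_mem_keys] at h ⊢
  rw [hk]
  exact List.mem_append.2 (Or.inl h)

-- the DFS loop, driven to an empty stack by the fuel budget
lemma pvLabelLoop_spec (g : List (List Int)) (col n cid : Int)
    (d0 : PySem.Dict (Int × Int) Int) (x0 : Int × Int)
    (hd0 : d0.keys.Nodup) (hx0 : pvGood g col n x0) :
    ∀ (fuel : Nat) (stack : List (Int × Int)) (comp : PySem.Dict (Int × Int) Int) (size : Int),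
      pvLabJ g col n cid d0 x0 comp stack size →
      stack.length + (n.toNat * n.toNat
        - (pvCells comp (fun v => decide (v = cid))).length) ≤ fuel →
      pvLabJ g col n cid d0 x0 (pvLabelLoop g col n cid fuel stack comp size).1 []
        (pvLabelLoop g col n cid fuel stack comp size).2 ∧
      (∀ x, comp.get? x = some cid →
        (pvLabelLoop g col n cid fuel stack comp size).1.get? x = some cid) := by
  intro fuel
  induction fuel with
  | zero =>
      intro stack comp size hJ hfuel
      have hq0 : stack = [] := List.length_eq_zero_iff.1 (by omega)
      subst hq0
      simp only [pvLabelLoop]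
      refine ⟨⟨hJ.1, hJ.2.1, hJ.2.2.1, by simp, ?_, hJ.2.2.2.2.2⟩, fun x hx => hx⟩
      intro x hx
      rcases hJ.2.2.2.2.1 x hx with h | h
      · simp at h
      · exact Or.inr h
  | succ fuel ih =>
      intro stack comp size hJ hfuel
      match stack with
      | [] =>
          simp only [pvLabelLoop]
          refine ⟨⟨hJ.1, hJ.2.1, hJ.2.2.1, by simp, ?_, hJ.2.2.2.2.2⟩, fun x hx => hx⟩
          intro x hx
          rcases hJ.2.2.2.2.1 x hx with h | h
          · simp at h
          · exact Or.inr h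
      | (r, c) :: stack' =>
          obtain ⟨hJ1, ⟨lnew, hJ2a, hJ2b⟩, hJ3, hJ4, hJ5, hJ6⟩ := hJ
          obtain ⟨l, e1, e2, e3, e4, e5, e6, e7⟩ :=
            pvLabelStep_fold g col n cid r c pvDirsB comp stack' size hJ1 hJ6
          set st := pvDirsB.foldl (pvLabelStep g col n cid r c) (comp, stack', size) with hst
          have hloop : pvLabelLoop g col n cid (fuel + 1) ((r, c) :: stack') comp size
              = pvLabelLoop g col n cid fuel st.2.1 st.1 st.2.2 := rfl
          have hrc : comp.get? (r, c) = some cid := hJ4 (r, c) List.mem_cons_self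
          have hrcReach := hJ3 (r, c) hrc
          have hmono : ∀ x, comp.get? x = some cid → st.1.get? x = some cid :=
            fun x hx => pvGet?_of_prefix e1 e5 hJ1 hx
          have hnewget : ∀ y ∈ l, st.1.get? y = some cid := by
            intro y hy
            apply PySem.Dict.get?_of_mem_items _ _ e5
            rw [e1]
            exact List.mem_append.2 (Or.inr (List.mem_map.2 ⟨y, hy, rfl⟩))
          have hJ3' : ∀ x, st.1.get? x = some cid →
              pvReach (pvGood g col n) (fun z => z = x0) x := by
            intro x hx
            rcases pvGet?_of_prefix' e1 e5 hJ1 hx with h | h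
            · exact hJ3 x h
            · have hxl : x ∈ l := by
                rcases List.mem_map.1 h with ⟨y, hy, he⟩
                cases he
                exact hy
              obtain ⟨hg, ⟨d', hd', he⟩, _⟩ := e4 x hxl
              exact pvReach.step (r, c) x hrcReach
                ((pvAdj_iff_dirB r c x).2 ⟨d', hd', he⟩) hg
          have hJnew : pvLabJ g col n cid d0 x0 st.1 st.2.1 st.2.2 := by
            refine ⟨e5, ⟨lnew ++ l.map (fun y => (y, cid)), ?_, ?_⟩, hJ3', ?_, ?_, e6⟩
            · rw [e1, hJ2a, List.append_assoc]
            · intro e he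
              rcases List.mem_append.1 he with he | he
              · exact hJ2b e he
              · rcases List.mem_map.1 he with ⟨y, _, rfl⟩
                rfl
            · intro y hy
              rw [e2] at hy
              rcases List.mem_append.1 hy with hy | hy
              · exact hnewget y (List.mem_reverse.1 hy)
              · exact hmono y (hJ4 y (List.mem_cons_of_mem _ hy))
            · intro x hx
              rcases pvGet?_of_prefix' e1 e5 hJ1 hx with h | h
              · rcases hJ5 x h with h' | h'
                · rcases List.mem_cons.1 h' with rfl | h''
                  · right
                    intro y hadj hg
                    rcases (pvAdj_iff_dirB r c y).1 hadj with ⟨d', hd', rfl⟩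
                    exact e7 d' hd' hg
                  · left
                    rw [e2]
                    exact List.mem_append.2 (Or.inr h'')
                · right
                  intro y hadj hg
                  exact pvContains_of_prefix e1 (h' y hadj hg)
              · left
                rw [e2]
                rcases List.mem_map.1 h with ⟨y, hy, he⟩
                cases he
                exact List.mem_append.2 (Or.inl (List.mem_reverse.2 hy))
          have hcard : (pvCells st.1 (fun v => decide (v = cid))).length
              ≤ n.toNat * n.toNat := by
            apply pvCardLe (pvCells_nodup st.1 e5 _)
            intro x hx
            rcases (pvMem_cells st.1 e5 _ x).1 hx with ⟨k, hk, hp⟩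
            simp only [decide_eq_true_eq] at hp
            rw [hp] at hk
            exact (pvReach_good hx0 (hJ3' x hk)).1
          have hsizes : (pvCells st.1 (fun v => decide (v = cid))).length
              = (pvCells comp (fun v => decide (v = cid))).length + l.length := by
            have h1 : st.2.2 = size + (l.length : Int) := e3
            rw [e6, hJ6] at h1
            omega
          have hfuel' : st.2.1.length + (n.toNat * n.toNat
              - (pvCells st.1 (fun v => decide (v = cid))).length) ≤ fuel := by
            have h2 : st.2.1.length = l.length + stack'.length := by
              rw [e2]; simp
            simp only [List.length_cons] at hfuel
            omega
          rw [hloop]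
          obtain ⟨hfin, hfinmono⟩ := ih st.2.1 st.1 st.2.2 hJnew hfuel'
          exact ⟨hfin, fun x hx => hfinmono x (hmono x hx)⟩

-- one seeded DFS: it labels exactly the reachable component, old entries untouched
lemma pvLabelSeed_spec (g : List (List Int)) (n col cid : Int)
    (d0 : PySem.Dict (Int × Int) Int) (x0 : Int × Int)
    (hd0 : d0.keys.Nodup) (hx0b : pvInB n x0) (hcol : pvAt g x0.1 x0.2 = col)
    (hfresh : ∀ e ∈ d0.items, e.2 ≠ cid) (hx0new : d0.contains x0 = false)
    (hclosed0 : ∀ y x, d0.contains y = true → pvAdj y x → pvInB n x →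
      pvAt g x.1 x.2 = pvAt g y.1 y.2 → d0.contains x = true)
    (hn : 0 ≤ n) :
    (pvLabelLoop g col n cid ((n * n).toNat + 1) [x0] (d0.insert x0 cid) 1).1.keys.Nodup ∧
    (∃ lnew, (pvLabelLoop g col n cid ((n * n).toNat + 1) [x0] (d0.insert x0 cid) 1).1.items
        = d0.items ++ lnew ∧ ∀ e ∈ lnew, e.2 = cid) ∧
    (∀ x, (pvLabelLoop g col n cid ((n * n).toNat + 1) [x0] (d0.insert x0 cid) 1).1.get? x
        = some cid ↔ pvReach (pvGood g col n) (fun z => z = x0) x) ∧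
    (pvLabelLoop g col n cid ((n * n).toNat + 1) [x0] (d0.insert x0 cid) 1).2
      = (((pvCells (pvLabelLoop g col n cid ((n * n).toNat + 1) [x0]
          (d0.insert x0 cid) 1).1 (fun v => decide (v = cid))).length : Nat) : Int) := by
  have hx0good : pvGood g col n x0 := ⟨hx0b, hcol⟩
  have hitems0 : (d0.insert x0 cid).items = d0.items ++ [(x0, cid)] :=
    PySem.Dict.items_insert_of_not_contains _ _ hx0new
  have hnd0' : (d0.insert x0 cid).keys.Nodup := PySem.Dict.nodup_keys_insert _ _ _ hd0
  have hget0 : (d0.insert x0 cid).get? x0 = some cid := PySem.Dict.get?_insert_self _ _ _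
  have hcells0 : (pvCells (d0.insert x0 cid) (fun v => decide (v = cid))) = [x0] := by
    unfold pvCells
    rw [hitems0, List.filter_append]
    have h1 : d0.items.filter (fun e => decide (e.2 = cid)) = [] := by
      rw [List.filter_eq_nil_iff]
      intro e he
      simpa using hfresh e he
    rw [h1]
    simp
  have hJ0 : pvLabJ g col n cid d0 x0 (d0.insert x0 cid) [x0] 1 := by
    refine ⟨hnd0', ⟨[(x0, cid)], hitems0, by simp⟩, ?_, ?_, ?_, by rw [hcells0]; simp⟩
    · intro x hx
      rcases pvGet?_of_prefix' hitems0 hnd0' hd0 hx with h | h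
      · exact absurd rfl (hfresh _ (PySem.Dict.mem_items_of_get?_eq_some _ h))
      · simp only [List.mem_singleton, Prod.mk.injEq] at h
        rw [h.1]
        exact pvReach.base x0 rfl
    · intro y hy
      simp only [List.mem_singleton] at hy
      subst hy
      exact hget0
    · intro x hx
      left
      rcases pvGet?_of_prefix' hitems0 hnd0' hd0 hx with h | h
      · exact absurd rfl (hfresh _ (PySem.Dict.mem_items_of_get?_eq_some _ h))
      · simp only [List.mem_singleton, Prod.mk.injEq] at h
        simp [h.1]
  have hNN : (n * n).toNat = n.toNat * n.toNat := by
    have : n * n = ((n.toNat * n.toNat : Nat) : Int) := by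
      push_cast [Int.toNat_of_nonneg hn]
      ring
    rw [this, Int.toNat_natCast]
  have hfuel : (1 : Nat) + (n.toNat * n.toNat
      - (pvCells (d0.insert x0 cid) (fun v => decide (v = cid))).length)
      ≤ (n * n).toNat + 1 := by
    rw [hcells0, hNN]
    simp
    omega
  obtain ⟨hJfin, hmono⟩ := pvLabelLoop_spec g col n cid d0 x0 hd0 hx0good
    ((n * n).toNat + 1) [x0] (d0.insert x0 cid) 1 hJ0 (by simpa using hfuel)
  obtain ⟨f1, ⟨lnew, f2a, f2b⟩, f3, _, f5, f6⟩ := hJfin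
  refine ⟨f1, ⟨lnew, f2a, f2b⟩, ?_, f6⟩
  intro x
  constructor
  · exact f3 x
  · -- reach ⊆ labelled: the final dict is closed
    intro hx
    have hmem : x ∈ pvCells (pvLabelLoop g col n cid ((n * n).toNat + 1) [x0]
        (d0.insert x0 cid) 1).1 (fun v => decide (v = cid)) := by
      refine pvReach_subset ?_ ?_ x hx
      · intro y hy
        have hy' : y = x0 := hy
        rw [hy']
        exact (pvMem_cells _ f1 _ _).2 ⟨cid, hmono x0 hget0, by simp⟩
      · intro y hy z hadj hg
        rcases (pvMem_cells _ f1 _ y).1 hy with ⟨k, hk, hp⟩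
        simp only [decide_eq_true_eq] at hp
        rw [hp] at hk
        rcases f5 y hk with h | h
        · simp at h
        · have hcont := h z hadj hg
          rw [PySem.Dict.contains_eq_isSome_get?] at hcont
          rcases hv : (pvLabelLoop g col n cid ((n * n).toNat + 1) [x0]
              (d0.insert x0 cid) 1).1.get? z with _ | v
          · rw [hv] at hcont; simp at hcont
          · by_cases hvc : v = cid
            · rw [hvc] at hv
              exact (pvMem_cells _ f1 _ _).2 ⟨cid, hv, by simp⟩
            · exfalso
              rcases pvGet?_of_prefix' f2a f1 hd0 hv with hold | hnew
              · -- z carries an old label, but y (colour col) is adjacent: d0 closure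
                have hyAt : pvAt g y.1 y.2 = col := (pvReach_good hx0good (f3 y hk)).2
                have hzAt : pvAt g z.1 z.2 = col := hg.2
                have hcz : d0.contains z = true := by
                  rw [PySem.Dict.contains_eq_isSome_get?, hold]
                  rfl
                have hcy : d0.contains y = true :=
                  hclosed0 z y hcz (pvAdj_symm hadj) (pvReach_good hx0good (f3 y hk)).1
                    (by rw [hyAt, hzAt])
                rw [PySem.Dict.contains_eq_isSome_get?] at hcy
                rcases hw : d0.get? y with _ | w
                · rw [hw] at hcy; simp at hcy
                · have := pvGet?_of_prefix f2a f1 hd0 hw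
                  rw [hk] at this
                  have hwcid : w = cid := by
                    injection this with hh
                    exact hh.symm
                  rw [hwcid] at hw
                  exact hfresh _ (PySem.Dict.mem_items_of_get?_eq_some _ hw) rfl
              · exact hvc (f2b _ hnew)
    rcases (pvMem_cells _ f1 _ x).1 hmem with ⟨k, hk, hp⟩
    simp only [decide_eq_true_eq] at hp
    rw [hp] at hk
    exact hk

-- ---- the scan invariant of the labelling pass ----
def pvLabInv (g : List (List Int)) (n : Int)
    (comp : PySem.Dict (Int × Int) Int) (colorof sizes : PySem.Dict Int Int) : Prop :=
  comp.keys.Nodup ∧ colorof.keys.Nodup ∧ sizes.keys.Nodup ∧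
  (∀ x k, comp.get? x = some k → pvInB n x ∧ colorof.get? k = some (pvAt g x.1 x.2)) ∧
  (∀ x y k, comp.get? x = some k → pvAdj x y → pvInB n y →
      pvAt g y.1 y.2 = pvAt g x.1 x.2 → comp.get? y = some k) ∧
  (∀ x y k, comp.get? x = some k → comp.get? y = some k →
      pvReach (pvGood g (pvAt g x.1 x.2) n) (fun z => z = x) y) ∧
  (∀ k, k ∈ colorof.keys → sizes.get? k
      = some (((pvCells comp (fun v => decide (v = k))).length : Nat) : Int)) ∧
  (∀ x k, comp.get? x = some k → k ∈ colorof.keys) ∧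
  (∀ k, k ∈ colorof.keys ↔ 0 ≤ k ∧ k < (colorof.size : Int)) ∧
  (∀ k, k ∈ sizes.keys ↔ k ∈ colorof.keys)

lemma pvLabelCell_spec (g : List (List Int)) (n : Int) (hn : 0 ≤ n)
    (comp : PySem.Dict (Int × Int) Int) (colorof sizes : PySem.Dict Int Int)
    (rc : Int × Int) (hrc : pvInB n rc)
    (hinv : pvLabInv g n comp colorof sizes) :
    pvLabInv g n (pvLabelCell g n (comp, colorof, sizes) rc).1
      (pvLabelCell g n (comp, colorof, sizes) rc).2.1
      (pvLabelCell g n (comp, colorof, sizes) rc).2.2 ∧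
    (∀ x v, comp.get? x = some v →
      (pvLabelCell g n (comp, colorof, sizes) rc).1.get? x = some v) ∧
    ((pvLabelCell g n (comp, colorof, sizes) rc).1.get? rc).isSome = true := by
  obtain ⟨L1, L2, L3, L4, L5, L6, L7, L8, L9, L10⟩ := hinv
  by_cases hc : comp.contains rc = true
  · have hcell : pvLabelCell g n (comp, colorof, sizes) rc = (comp, colorof, sizes) := by
      unfold pvLabelCell
      rw [if_neg (by simpa using hc)]
    rw [hcell]
    refine ⟨⟨L1, L2, L3, L4, L5, L6, L7, L8, L9, L10⟩, fun x v h => h, ?_⟩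
    rw [← PySem.Dict.contains_eq_isSome_get?]
    exact hc
  · have hcF : comp.contains rc = false := by simpa using hc
    have hcell : pvLabelCell g n (comp, colorof, sizes) rc
        = ((pvLabelLoop g (pvAt g rc.1 rc.2) n (colorof.size : Int) ((n * n).toNat + 1) [rc]
             (comp.insert rc (colorof.size : Int)) 1).1,
           colorof.insert (colorof.size : Int) (pvAt g rc.1 rc.2),
           sizes.insert (colorof.size : Int)
             (pvLabelLoop g (pvAt g rc.1 rc.2) n (colorof.size : Int) ((n * n).toNat + 1) [rc]
               (comp.insert rc (colorof.size : Int)) 1).2) := by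
      unfold pvLabelCell
      rw [if_pos (by simpa using hc)]
    have hvalnotcid : ∀ x v, comp.get? x = some v → v ≠ (colorof.size : Int) := by
      intro x v h
      have := (L9 v).1 (L8 x v h)
      omega
    have hfresh : ∀ e ∈ comp.items, e.2 ≠ (colorof.size : Int) := by
      rintro ⟨a, b⟩ he
      exact hvalnotcid a b (PySem.Dict.get?_of_mem_items _ he L1)
    have hclosed0 : ∀ y x, comp.contains y = true → pvAdj y x → pvInB n x →
        pvAt g x.1 x.2 = pvAt g y.1 y.2 → comp.contains x = true := by
      intro y x hy hadj hxb hat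
      rw [PySem.Dict.contains_eq_isSome_get?] at hy ⊢
      rcases hv : comp.get? y with _ | v
      · rw [hv] at hy; simp at hy
      · rw [L5 y x v hv hadj hxb hat]
        rfl
    obtain ⟨S1, ⟨lnew, S2a, S2b⟩, S3, S4⟩ :=
      pvLabelSeed_spec g n (pvAt g rc.1 rc.2) (colorof.size : Int) comp rc
        L1 hrc rfl hfresh hcF hclosed0 hn
    set cid : Int := (colorof.size : Int) with hcid
    set col : Int := pvAt g rc.1 rc.2 with hcol
    set res := pvLabelLoop g col n cid ((n * n).toNat + 1) [rc] (comp.insert rc cid) 1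
      with hres
    have hx0good : pvGood g col n rc := ⟨hrc, rfl⟩
    have Sold : ∀ x v, comp.get? x = some v → res.1.get? x = some v :=
      fun x v h => pvGet?_of_prefix S2a S1 L1 h
    have Sold' : ∀ x v, res.1.get? x = some v → comp.get? x = some v ∨ v = cid := by
      intro x v h
      rcases pvGet?_of_prefix' S2a S1 L1 h with h' | h'
      · exact Or.inl h'
      · exact Or.inr (S2b _ h')
    have hAtcid : ∀ x, res.1.get? x = some cid → pvInB n x ∧ pvAt g x.1 x.2 = col :=
      fun x h => pvReach_good hx0good ((S3 x).1 h)
    have hcidnot : cid ∉ colorof.keys := by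
      intro h
      have := (L9 cid).1 h
      omega
    have hcidnotS : cid ∉ sizes.keys := fun h => hcidnot ((L10 cid).1 h)
    have hccF : colorof.contains cid = false := by
      rcases h : colorof.contains cid with _ | _
      · rfl
      · exact absurd ((PySem.Dict.contains_iff_mem_keys _ _).1 h) hcidnot
    have hscF : sizes.contains cid = false := by
      rcases h : sizes.contains cid with _ | _
      · rfl
      · exact absurd ((PySem.Dict.contains_iff_mem_keys _ _).1 h) hcidnotS
    have hsize' : ((colorof.insert cid col).size : Int) = (colorof.size : Int) + 1 := by
      have := PySem.Dict.items_insert_of_not_contains colorof col hccF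
      simp only [PySem.Dict.size]
      rw [this]
      simp
    have hcells_old : ∀ k : Int, k ≠ cid →
        pvCells res.1 (fun v => decide (v = k)) = pvCells comp (fun v => decide (v = k)) := by
      intro k hk
      unfold pvCells
      rw [S2a, List.filter_append]
      have : lnew.filter (fun e => decide (e.2 = k)) = [] := by
        rw [List.filter_eq_nil_iff]
        intro e he
        simp only [decide_eq_true_eq]
        rw [S2b e he]
        exact fun hh => hk hh.symm
      rw [this]
      simp
    rw [hcell]
    refine ⟨⟨S1, PySem.Dict.nodup_keys_insert _ _ _ L2, PySem.Dict.nodup_keys_insert _ _ _ L3,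
      ?_, ?_, ?_, ?_, ?_, ?_, ?_⟩, fun x v h => Sold x v h, ?_⟩
    · -- bounds and colour of every labelled cell
      intro x k h
      rcases Sold' x k h with h' | h'
      · obtain ⟨hb, hcolk⟩ := L4 x k h'
        refine ⟨hb, ?_⟩
        rw [PySem.Dict.get?_insert]
        rw [if_neg (hvalnotcid x k h')]
        exact hcolk
      · rw [h'] at h
        obtain ⟨hb, hat⟩ := hAtcid x h
        refine ⟨hb, ?_⟩
        rw [h', PySem.Dict.get?_insert, if_pos rfl, hat]
    · -- closure
      intro x y k h hadj hyb hat
      rcases Sold' x k h with h' | h'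
      · have := L5 x y k h' hadj hyb hat
        exact Sold y k this
      · rw [h'] at h ⊢
        obtain ⟨hb, hatx⟩ := hAtcid x h
        have hgy : pvGood g col n y := ⟨hyb, by rw [hat, hatx]⟩
        exact (S3 y).2 (pvReach.step x y ((S3 x).1 h) hadj hgy)
    · -- connectivity
      intro x y k hx hy
      rcases Sold' x k hx with hx' | hx'
      · rcases Sold' y k hy with hy' | hy'
        · exact L6 x y k hx' hy'
        · exact absurd hy' (hvalnotcid x k hx')
      · rcases Sold' y k hy with hy' | hy'
        · rw [hx'] at hx
          exact absurd hx' (fun hh => (hvalnotcid y k hy') hx')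
        · rw [hx'] at hx
          rw [hy'] at hy
          have hrx := (S3 x).1 hx
          have hry := (S3 y).1 hy
          have hatx : pvAt g x.1 x.2 = col := (pvReach_good hx0good hrx).2
          rw [hatx]
          exact pvReach_mono (fun z hz => by rw [hz]; exact pvReach_symm hx0good x hrx) y hry
    · -- sizes
      intro k hk
      rcases (PySem.Dict.mem_keys_insert _ _ _ _).1 hk with rfl | hk'
      · rw [PySem.Dict.get?_insert, if_pos rfl, S4]
      · have hkne : k ≠ cid := fun hh => hcidnot (hh ▸ hk')
        rw [PySem.Dict.get?_insert, if_neg hkne, hcells_old k hkne]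
        exact L7 k hk'
    · -- values land in colorof.keys
      intro x k h
      rcases Sold' x k h with h' | h'
      · exact (PySem.Dict.mem_keys_insert _ _ _ _).2 (Or.inr (L8 x k h'))
      · exact (PySem.Dict.mem_keys_insert _ _ _ _).2 (Or.inl h')
    · -- keys are 0..size-1
      intro k
      rw [PySem.Dict.mem_keys_insert, hsize']
      constructor
      · rintro (rfl | hk)
        · omega
        · have := (L9 k).1 hk
          omega
      · intro hk
        by_cases hkc : k = cid
        · exact Or.inl hkc
        · right
          rw [L9 k]
          have : (k ≠ cid) := hkc
          omega
    · -- sizes.keys = colorof.keys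
      intro k
      rw [PySem.Dict.mem_keys_insert, PySem.Dict.mem_keys_insert]
      constructor
      · rintro (rfl | hk)
        · exact Or.inl rfl
        · exact Or.inr ((L10 k).1 hk)
      · rintro (rfl | hk)
        · exact Or.inl rfl
        · exact Or.inr ((L10 k).2 hk)
    · -- the scanned cell is now labelled
      have : res.1.get? rc = some cid := (S3 rc).2 (pvReach.base rc rfl)
      rw [this]
      rfl

-- the nested for-loops as a single fold over the cell list
def pvScanCells (n : Int) : List (Int × Int) :=
  (PySem.List.pyRange 0 n).flatMap (fun r => (PySem.List.pyRange 0 n).map (fun c => (r, c)))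

lemma pvFoldl_nested {σ : Type} (f : σ → (Int × Int) → σ) (m : List Int) :
    ∀ (l : List Int) (init : σ),
      l.foldl (fun st r => m.foldl (fun st c => f st (r, c)) st) init
        = (l.flatMap (fun r => m.map (fun c => (r, c)))).foldl f init := by
  intro l
  induction l with
  | nil => intro init; simp
  | cons r t ih =>
      intro init
      rw [List.foldl_cons, List.flatMap_cons, List.foldl_append, ih, List.foldl_map]

lemma pvMem_scan (n : Int) (rc : Int × Int) : rc ∈ pvScanCells n ↔ pvInB n rc := by
  unfold pvScanCells
  obtain ⟨r, c⟩ := rc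
  simp only [List.mem_flatMap, List.mem_map, PySem.List.mem_pyRange_one, Prod.mk.injEq]
  constructor
  · rintro ⟨a, ⟨h1, h2⟩, b, ⟨h3, h4⟩, rfl, rfl⟩
    exact ⟨h1, h2, h3, h4⟩
  · rintro ⟨h1, h2, h3, h4⟩
    exact ⟨r, ⟨h1, h2⟩, c, ⟨h3, h4⟩, rfl, rfl⟩

lemma pvLabelScan_spec (g : List (List Int)) (n : Int) (hn : 0 ≤ n) :
    ∀ (cells : List (Int × Int))
      (st : PySem.Dict (Int × Int) Int × PySem.Dict Int Int × PySem.Dict Int Int),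
      (∀ rc ∈ cells, pvInB n rc) → pvLabInv g n st.1 st.2.1 st.2.2 →
      pvLabInv g n (cells.foldl (pvLabelCell g n) st).1
        (cells.foldl (pvLabelCell g n) st).2.1 (cells.foldl (pvLabelCell g n) st).2.2 ∧
      (∀ x v, st.1.get? x = some v → (cells.foldl (pvLabelCell g n) st).1.get? x = some v) ∧
      (∀ rc ∈ cells, ((cells.foldl (pvLabelCell g n) st).1.get? rc).isSome = true) := by
  intro cells
  induction cells with
  | nil => intro st _ hinv; exact ⟨hinv, fun x v h => h, by simp⟩
  | cons rc t ih =>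
      intro st hcells hinv
      obtain ⟨comp, colorof, sizes⟩ := st
      obtain ⟨hinv', hmono', hsome'⟩ :=
        pvLabelCell_spec g n hn comp colorof sizes rc (hcells rc List.mem_cons_self) hinv
      rw [List.foldl_cons]
      obtain ⟨hinv'', hmono'', hsome''⟩ :=
        ih (pvLabelCell g n (comp, colorof, sizes) rc)
          (fun y hy => hcells y (List.mem_cons_of_mem _ hy)) hinv'
      refine ⟨hinv'', fun x v h => hmono'' x v (hmono' x v h), ?_⟩
      intro y hy
      rcases List.mem_cons.1 hy with rfl | hy'
      · rcases hv : (pvLabelCell g n (comp, colorof, sizes) y).1.get? y with _ | v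
        · rw [hv] at hsome'; simp at hsome'
        · rw [hmono'' y v hv]
          rfl
      · exact hsome'' y hy'

lemma pvLabelAll_eq (g : List (List Int)) (n : Int) :
    pvLabelAll g n = (pvScanCells n).foldl (pvLabelCell g n) (⟨[]⟩, ⟨[]⟩, ⟨[]⟩) := by
  unfold pvLabelAll pvScanCells
  rw [pvFoldl_nested]

lemma pvLabInv_empty (g : List (List Int)) (n : Int) :
    pvLabInv g n ⟨[]⟩ ⟨[]⟩ ⟨[]⟩ := by
  refine ⟨by simp [PySem.Dict.keys], by simp [PySem.Dict.keys], by simp [PySem.Dict.keys],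
    ?_, ?_, ?_, ?_, ?_, ?_, ?_⟩ <;>
    simp [PySem.Dict.get?, PySem.Dict.keys, PySem.Dict.size]

lemma pvLabelAll_spec (g : List (List Int)) (n : Int) (hn : 0 ≤ n) :
    pvLabInv g n (pvLabelAll g n).1 (pvLabelAll g n).2.1 (pvLabelAll g n).2.2 ∧
    (∀ x, (((pvLabelAll g n).1.get? x).isSome = true) ↔ pvInB n x) := by
  rw [pvLabelAll_eq]
  obtain ⟨hinv, _, hall⟩ := pvLabelScan_spec g n hn (pvScanCells n) (⟨[]⟩, ⟨[]⟩, ⟨[]⟩)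
    (fun rc hrc => (pvMem_scan n rc).1 hrc) (pvLabInv_empty g n)
  refine ⟨hinv, ?_⟩
  intro x
  constructor
  · intro hx
    rcases hv : ((pvScanCells n).foldl (pvLabelCell g n) (⟨[]⟩, ⟨[]⟩, ⟨[]⟩)).1.get? x with _ | v
    · rw [hv] at hx; simp at hx
    · exact (hinv.2.2.2.1 x v hv).1
  · intro hx
    exact hall x ((pvMem_scan n x).2 hx)

-- ---- the component adjacency scan ----
lemma pvNbrsInit_getD (l : List Int) (j : Int) :
    ∀ (d : PySem.Dict Int (List Int)), (∀ k, d.getD k [] = []) →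
      ∀ k, ((l.foldl (fun d k => d.insert k ([] : List Int)) d).getD k []) = [] := by
  induction l with
  | nil => intro d hd k; exact hd k
  | cons a t ih =>
      intro d hd k
      rw [List.foldl_cons]
      refine ih _ ?_ k
      intro k'
      rw [PySem.Dict.getD_insert]
      split_ifs <;> simp [hd]

lemma pvNbrsAdd_mem (nb : PySem.Dict Int (List Int)) (a b k j : Int) (hab : a ≠ b) :
    (j ∈ ((nb.modify a [] (fun s => PySem.Set.add s b)).modify b
        [] (fun s => PySem.Set.add s a)).getD k []) ↔
      (j ∈ nb.getD k [] ∨ (k = a ∧ j = b) ∨ (k = b ∧ j = a)) := by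
  rw [PySem.Dict.getD_modify]
  by_cases hkb : k = b
  · rw [if_pos hkb, PySem.Dict.getD_modify, if_neg (by omega : ¬ b = a), pvMemAddI]
    subst hkb
    constructor
    · rintro (h | rfl)
      · exact Or.inl h
      · exact Or.inr (Or.inr ⟨rfl, rfl⟩)
    · rintro (h | ⟨h1, h2⟩ | ⟨h1, h2⟩)
      · exact Or.inl h
      · omega
      · exact Or.inr h2
  · rw [if_neg hkb, PySem.Dict.getD_modify]
    by_cases hka : k = a
    · rw [if_pos hka, pvMemAddI]
      subst hka
      constructor
      · rintro (h | rfl)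
        · exact Or.inl h
        · exact Or.inr (Or.inl ⟨rfl, rfl⟩)
      · rintro (h | ⟨h1, h2⟩ | ⟨h1, h2⟩)
        · exact Or.inl h
        · exact Or.inr h2
        · omega
    · rw [if_neg hka]
      constructor
      · exact Or.inl
      · rintro (h | ⟨h1, h2⟩ | ⟨h1, h2⟩)
        · exact h
        · omega
        · omega

-- which ordered scan pairs put j into nbrs[k]
def pvNbrsP (comp : PySem.Dict (Int × Int) Int) (n : Int) (P : List (Int × Int))
    (k j : Int) : Prop :=
  ∃ rc ∈ P, ∃ y ∈ [(rc.1 + 1, rc.2), (rc.1, rc.2 + 1)], y.1 < n ∧ y.2 < n ∧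
    comp.getD rc 0 ≠ comp.getD y 0 ∧
    ((k = comp.getD rc 0 ∧ j = comp.getD y 0) ∨ (k = comp.getD y 0 ∧ j = comp.getD rc 0))

lemma pvNbrsScan (comp : PySem.Dict (Int × Int) Int) (n : Int) :
    ∀ (P : List (Int × Int)) (nb : PySem.Dict Int (List Int)) (M : Int → Int → Prop),
      (∀ k j, j ∈ nb.getD k [] ↔ M k j) →
      ∀ k j, (j ∈ (P.foldl (pvNbrsCell comp n) nb).getD k []) ↔
        (M k j ∨ pvNbrsP comp n P k j) := by
  intro P
  induction P with
  | nil =>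
      intro nb M hM k j
      rw [List.foldl_nil, hM]
      unfold pvNbrsP
      simp
  | cons rc t ih =>
      intro nb M hM k j
      rw [List.foldl_cons]
      have hstep : ∀ k j, j ∈ (pvNbrsCell comp n nb rc).getD k [] ↔
          (M k j ∨ pvNbrsP comp n [rc] k j) := by
        intro k j
        unfold pvNbrsCell
        rw [List.foldl_cons, List.foldl_cons, List.foldl_nil]
        by_cases h1 : (rc.1 + 1, rc.2).1 < n ∧ (rc.1 + 1, rc.2).2 < n ∧
            comp.getD rc 0 ≠ comp.getD (rc.1 + 1, rc.2) 0
        · rw [if_pos h1]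
          by_cases h2 : (rc.1, rc.2 + 1).1 < n ∧ (rc.1, rc.2 + 1).2 < n ∧
              comp.getD rc 0 ≠ comp.getD (rc.1, rc.2 + 1) 0
          · rw [if_pos h2]
            rw [pvNbrsAdd_mem _ _ _ _ _ h2.2.2, pvNbrsAdd_mem _ _ _ _ _ h1.2.2, hM]
            unfold pvNbrsP
            simp only [List.mem_singleton, List.mem_cons, List.mem_nil_iff, or_false]
            constructor
            · rintro ((h | h | h) | h | h)
              · exact Or.inl h
              · exact Or.inr ⟨rc, rfl, (rc.1 + 1, rc.2), Or.inl rfl, h1.1, h1.2.1, h1.2.2,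
                  Or.inl ⟨h.1, h.2⟩⟩
              · exact Or.inr ⟨rc, rfl, (rc.1 + 1, rc.2), Or.inl rfl, h1.1, h1.2.1, h1.2.2,
                  Or.inr ⟨h.1, h.2⟩⟩
              · exact Or.inr ⟨rc, rfl, (rc.1, rc.2 + 1), Or.inr rfl, h2.1, h2.2.1, h2.2.2,
                  Or.inl ⟨h.1, h.2⟩⟩
              · exact Or.inr ⟨rc, rfl, (rc.1, rc.2 + 1), Or.inr rfl, h2.1, h2.2.1, h2.2.2,
                  Or.inr ⟨h.1, h.2⟩⟩
            · rintro (h | ⟨rc', rfl, y, hy, hy1, hy2, hne, hkj⟩)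
              · exact Or.inl (Or.inl h)
              · rcases hy with rfl | rfl
                · rcases hkj with h | h
                  · exact Or.inl (Or.inr (Or.inl ⟨h.1, h.2⟩))
                  · exact Or.inl (Or.inr (Or.inr ⟨h.1, h.2⟩))
                · rcases hkj with h | h
                  · exact Or.inr (Or.inl ⟨h.1, h.2⟩)
                  · exact Or.inr (Or.inr ⟨h.1, h.2⟩)
          · rw [if_neg h2]
            rw [pvNbrsAdd_mem _ _ _ _ _ h1.2.2, hM]
            unfold pvNbrsP
            simp only [List.mem_singleton, List.mem_cons, List.mem_nil_iff, or_false]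
            constructor
            · rintro (h | h | h)
              · exact Or.inl h
              · exact Or.inr ⟨rc, rfl, (rc.1 + 1, rc.2), Or.inl rfl, h1.1, h1.2.1, h1.2.2,
                  Or.inl ⟨h.1, h.2⟩⟩
              · exact Or.inr ⟨rc, rfl, (rc.1 + 1, rc.2), Or.inl rfl, h1.1, h1.2.1, h1.2.2,
                  Or.inr ⟨h.1, h.2⟩⟩
            · rintro (h | ⟨rc', rfl, y, hy, hy1, hy2, hne, hkj⟩)
              · exact Or.inl h
              · rcases hy with rfl | rfl
                · rcases hkj with h | h
                  · exact Or.inr (Or.inl ⟨h.1, h.2⟩)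
                  · exact Or.inr (Or.inr ⟨h.1, h.2⟩)
                · exact absurd ⟨hy1, hy2, hne⟩ h2
        · rw [if_neg h1]
          by_cases h2 : (rc.1, rc.2 + 1).1 < n ∧ (rc.1, rc.2 + 1).2 < n ∧
              comp.getD rc 0 ≠ comp.getD (rc.1, rc.2 + 1) 0
          · rw [if_pos h2]
            rw [pvNbrsAdd_mem _ _ _ _ _ h2.2.2, hM]
            unfold pvNbrsP
            simp only [List.mem_singleton, List.mem_cons, List.mem_nil_iff, or_false]
            constructor
            · rintro (h | h | h)
              · exact Or.inl h
              · exact Or.inr ⟨rc, rfl, (rc.1, rc.2 + 1), Or.inr rfl, h2.1, h2.2.1, h2.2.2,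
                  Or.inl ⟨h.1, h.2⟩⟩
              · exact Or.inr ⟨rc, rfl, (rc.1, rc.2 + 1), Or.inr rfl, h2.1, h2.2.1, h2.2.2,
                  Or.inr ⟨h.1, h.2⟩⟩
            · rintro (h | ⟨rc', rfl, y, hy, hy1, hy2, hne, hkj⟩)
              · exact Or.inl h
              · rcases hy with rfl | rfl
                · exact absurd ⟨hy1, hy2, hne⟩ h1
                · rcases hkj with h | h
                  · exact Or.inr (Or.inl ⟨h.1, h.2⟩)
                  · exact Or.inr (Or.inr ⟨h.1, h.2⟩)
          · rw [if_neg h2, hM]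
            unfold pvNbrsP
            simp only [List.mem_singleton, List.mem_cons, List.mem_nil_iff, or_false]
            constructor
            · exact Or.inl
            · rintro (h | ⟨rc', rfl, y, hy, hy1, hy2, hne, hkj⟩)
              · exact h
              · rcases hy with rfl | rfl
                · exact absurd ⟨hy1, hy2, hne⟩ h1
                · exact absurd ⟨hy1, hy2, hne⟩ h2
      have hrec := ih (pvNbrsCell comp n nb rc)
        (fun k j => M k j ∨ pvNbrsP comp n [rc] k j) hstep
      rw [hrec k j]
      constructor
      · rintro ((h | h1) | h2)
        · exact Or.inl h
        · obtain ⟨rc', hrc', rest⟩ := h1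
          exact Or.inr ⟨rc', List.mem_cons.2 (Or.inl (List.mem_singleton.1 hrc')), rest⟩
        · obtain ⟨rc', hrc', rest⟩ := h2
          exact Or.inr ⟨rc', List.mem_cons_of_mem _ hrc', rest⟩
      · rintro (h | h1)
        · exact Or.inl (Or.inl h)
        · obtain ⟨rc', hrc', rest⟩ := h1
          rcases List.mem_cons.1 hrc' with heq | hm
          · exact Or.inl (Or.inr ⟨rc', List.mem_singleton.2 heq, rest⟩)
          · exact Or.inr ⟨rc', hm, rest⟩

lemma pvNbrsAll_spec (comp : PySem.Dict (Int × Int) Int) (colorof : PySem.Dict Int Int)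
    (n : Int) (hF1 : ∀ x, ((comp.get? x).isSome = true) ↔ pvInB n x) :
    ∀ k j, (j ∈ (pvNbrsAll comp colorof n).getD k []) ↔
      (k ≠ j ∧ ∃ x y, comp.get? x = some k ∧ comp.get? y = some j ∧ pvAdj x y) := by
  have hAll : pvNbrsAll comp colorof n = (pvScanCells n).foldl (pvNbrsCell comp n)
      (colorof.keys.foldl (fun d k => d.insert k ([] : List Int)) ⟨[]⟩) := by
    unfold pvNbrsAll pvScanCells
    rw [pvFoldl_nested]
  have hinit : ∀ k j, (j ∈ ((colorof.keys.foldl (fun d k => d.insert k ([] : List Int))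
      (⟨[]⟩ : PySem.Dict Int (List Int))).getD k [])) ↔ False := by
    intro k j
    rw [pvNbrsInit_getD colorof.keys j _ (fun k => by simp [PySem.Dict.getD, PySem.Dict.get?]) k]
    simp
  have hsome : ∀ (x : Int × Int), pvInB n x → comp.get? x = some (comp.getD x 0) := by
    intro x hx
    rcases hv : comp.get? x with _ | v
    · exfalso
      have := (hF1 x).2 hx
      rw [hv] at this
      simp at this
    · rw [PySem.Dict.getD_eq_get?_getD, hv]
      rfl
  intro k j
  rw [hAll, pvNbrsScan comp n (pvScanCells n) _ (fun k j => False) hinit k j]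
  unfold pvNbrsP
  simp only [false_or]
  constructor
  · rintro ⟨rc, hrc, y, hy, hy1, hy2, hne, hkj⟩
    have hrcB : pvInB n rc := (pvMem_scan n rc).1 hrc
    have hyB : pvInB n y := by
      rcases List.mem_cons.1 hy with rfl | hy'
      · exact ⟨by have := hrcB.1; omega, hy1, hrcB.2.2.1, hy2⟩
      · simp only [List.mem_singleton] at hy'
        subst hy'
        exact ⟨hrcB.1, hy1, by have := hrcB.2.2.1; omega, hy2⟩
    have hadj : pvAdj rc y := by
      rcases List.mem_cons.1 hy with rfl | hy'
      · exact Or.inr (Or.inr (Or.inl (by obtain ⟨a, b⟩ := rc; rfl)))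
      · simp only [List.mem_singleton] at hy'
        subst hy'
        exact Or.inl (by obtain ⟨a, b⟩ := rc; rfl)
    rcases hkj with ⟨hk, hj⟩ | ⟨hk, hj⟩
    · exact ⟨by omega, rc, y, by rw [hk]; exact hsome rc hrcB,
        by rw [hj]; exact hsome y hyB, hadj⟩
    · exact ⟨by omega, y, rc, by rw [hk]; exact hsome y hyB,
        by rw [hj]; exact hsome rc hrcB, pvAdj_symm hadj⟩
  · rintro ⟨hne, x, y, hx, hy, hadj⟩
    have hxB : pvInB n x := (hF1 x).1 (by rw [hx]; rfl)
    have hyB : pvInB n y := (hF1 y).1 (by rw [hy]; rfl)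
    have hgx : comp.getD x 0 = k := by
      rw [PySem.Dict.getD_eq_get?_getD, hx]; rfl
    have hgy : comp.getD y 0 = j := by
      rw [PySem.Dict.getD_eq_get?_getD, hy]; rfl
    rcases hadj with h | h | h | h
    · refine ⟨x, (pvMem_scan n x).2 hxB, y, by simp [h], ?_, ?_, ?_, ?_⟩
      · exact hyB.2.1
      · exact hyB.2.2.2
      · rw [hgx, hgy]; omega
      · exact Or.inl ⟨hgx.symm, hgy.symm⟩
    · have hx2 : x = (y.1, y.2 + 1) := by
        obtain ⟨a, b⟩ := x; obtain ⟨c, d⟩ := y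
        simp only [Prod.mk.injEq] at h ⊢
        omega
      refine ⟨y, (pvMem_scan n y).2 hyB, x, by simp [hx2], ?_, ?_, ?_, ?_⟩
      · exact hxB.2.1
      · exact hxB.2.2.2
      · rw [hgx, hgy]; omega
      · exact Or.inr ⟨hgx.symm, hgy.symm⟩
    · refine ⟨x, (pvMem_scan n x).2 hxB, y, by simp [h], ?_, ?_, ?_, ?_⟩
      · exact hyB.2.1
      · exact hyB.2.2.2
      · rw [hgx, hgy]; omega
      · exact Or.inl ⟨hgx.symm, hgy.symm⟩
    · have hx2 : x = (y.1 + 1, y.2) := by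
        obtain ⟨a, b⟩ := x; obtain ⟨c, d⟩ := y
        simp only [Prod.mk.injEq] at h ⊢
        omega
      refine ⟨y, (pvMem_scan n y).2 hyB, x, by simp [hx2], ?_, ?_, ?_, ?_⟩
      · exact hxB.2.1
      · exact hxB.2.2.2
      · rw [hgx, hgy]; omega
      · exact Or.inr ⟨hgx.symm, hgy.symm⟩

-- ---- the greedy round: boundary set, gains, and the loop invariant ----
lemma pvBoundaryInner (region : List Int) (l : List Int) :
    ∀ (acc : List Int) (y : Int),
      (y ∈ l.foldl (fun acc k => if k ∈ region then acc else PySem.Set.add acc k) acc) ↔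
        (y ∈ acc ∨ (y ∈ l ∧ y ∉ region)) := by
  induction l with
  | nil => intro acc y; simp
  | cons k t ih =>
      intro acc y
      rw [List.foldl_cons]
      by_cases hk : k ∈ region
      · rw [if_pos hk, ih]
        constructor
        · rintro (h | ⟨h1, h2⟩)
          · exact Or.inl h
          · exact Or.inr ⟨List.mem_cons_of_mem _ h1, h2⟩
        · rintro (h | ⟨h1, h2⟩)
          · exact Or.inl h
          · rcases List.mem_cons.1 h1 with rfl | h1'
            · exact absurd hk h2
            · exact Or.inr ⟨h1', h2⟩
      · rw [if_neg hk, ih]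
        constructor
        · rintro (h | ⟨h1, h2⟩)
          · rcases pvMemAddI.1 h with h' | rfl
            · exact Or.inl h'
            · exact Or.inr ⟨List.mem_cons_self, hk⟩
          · exact Or.inr ⟨List.mem_cons_of_mem _ h1, h2⟩
        · rintro (h | ⟨h1, h2⟩)
          · exact Or.inl (pvMemAddI.2 (Or.inl h))
          · rcases List.mem_cons.1 h1 with rfl | h1'
            · exact Or.inl (pvMemAddI.2 (Or.inr rfl))
            · exact Or.inr ⟨h1', h2⟩

lemma pvBoundaryInnerNodup (region : List Int) (l : List Int) :
    ∀ (acc : List Int), acc.Nodup →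
      (l.foldl (fun acc k => if k ∈ region then acc else PySem.Set.add acc k) acc).Nodup := by
  induction l with
  | nil => intro acc h; exact h
  | cons k t ih =>
      intro acc h
      rw [List.foldl_cons]
      by_cases hk : k ∈ region
      · rw [if_pos hk]; exact ih acc h
      · rw [if_neg hk]; exact ih _ (pvNodupAddI h)

lemma pvBoundaryMem (nbrs : PySem.Dict Int (List Int)) (region : List Int) :
    ∀ (l : List Int) (acc : List Int) (y : Int),
      (y ∈ l.foldl (fun acc j => (nbrs.getD j []).foldl
          (fun acc k => if k ∈ region then acc else PySem.Set.add acc k) acc) acc) ↔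
        (y ∈ acc ∨ ∃ j ∈ l, y ∈ nbrs.getD j [] ∧ y ∉ region) := by
  intro l
  induction l with
  | nil => intro acc y; simp
  | cons j t ih =>
      intro acc y
      rw [List.foldl_cons, ih, pvBoundaryInner]
      constructor
      · rintro ((h | ⟨h1, h2⟩) | ⟨j', hj', h1, h2⟩)
        · exact Or.inl h
        · exact Or.inr ⟨j, List.mem_cons_self, h1, h2⟩
        · exact Or.inr ⟨j', List.mem_cons_of_mem _ hj', h1, h2⟩
      · rintro (h | ⟨j', hj', h1, h2⟩)
        · exact Or.inl (Or.inl h)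
        · rcases List.mem_cons.1 hj' with rfl | hj''
          · exact Or.inl (Or.inr ⟨h1, h2⟩)
          · exact Or.inr ⟨j', hj'', h1, h2⟩

lemma pvBoundaryNodup (nbrs : PySem.Dict Int (List Int)) (region : List Int) :
    ∀ (l : List Int) (acc : List Int), acc.Nodup →
      (l.foldl (fun acc j => (nbrs.getD j []).foldl
          (fun acc k => if k ∈ region then acc else PySem.Set.add acc k) acc) acc).Nodup := by
  intro l
  induction l with
  | nil => intro acc h; exact h
  | cons j t ih =>
      intro acc h
      rw [List.foldl_cons]
      exact ih _ (pvBoundaryInnerNodup region _ acc h)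

lemma pvMemUpdateI (l : List Int) :
    ∀ (s : List Int) (y : Int), (y ∈ PySem.Set.update s l) ↔ (y ∈ s ∨ y ∈ l) := by
  induction l with
  | nil => intro s y; simp [PySem.Set.update]
  | cons k t ih =>
      intro s y
      rw [PySem.Set.update_cons, ih]
      rw [pvMemAddI]
      constructor
      · rintro ((h | rfl) | h)
        · exact Or.inl h
        · exact Or.inr List.mem_cons_self
        · exact Or.inr (List.mem_cons_of_mem _ h)
      · rintro (h | h)
        · exact Or.inl (Or.inl h)
        · rcases List.mem_cons.1 h with rfl | h'
          · exact Or.inl (Or.inr rfl)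
          · exact Or.inr h'

lemma pvFoldl_sum_if (P : Int → Prop) [DecidablePred P] (f : Int → Int) :
    ∀ (l : List Int) (s0 : Int),
      l.foldl (fun s k => if P k then s + f k else s) s0
        = s0 + ((l.filter (fun k => decide (P k))).map f).sum := by
  intro l
  induction l with
  | nil => intro s0; simp
  | cons k t ih =>
      intro s0
      rw [List.foldl_cons]
      by_cases hk : P k
      · rw [if_pos hk, ih, List.filter_cons, if_pos (by simpa using hk)]
        simp
        ring
      · rw [if_neg hk, ih, List.filter_cons, if_neg (by simpa using hk)]

lemma pvSolveLoopB_succ (n : Int) (colorof sizes : PySem.Dict Int Int)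
    (nbrs : PySem.Dict Int (List Int)) (fuel : Nat) (region : List Int)
    (cells cur : Int) (chosen : List Int) :
    pvSolveLoopB n colorof sizes nbrs (fuel + 1) region cells cur chosen =
      if cells < n * n then
        match (PySem.List.pyRange 1 7).foldl
          (fun best color =>
            if color ≠ cur then
              let gain := (region.foldl (fun acc j => (nbrs.getD j []).foldl
                  (fun acc k => if k ∈ region then acc else PySem.Set.add acc k) acc) []).foldl
                (fun s k => if colorof.getD k 0 = color then s + sizes.getD k 0 else s) 0
              match best with
              | none => some (gain, color)
              | some b => if b.1 < gain then some (gain, color) else best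
            else best)
          (none : Option (Int × Int)) with
        | none => pvOutB chosen
        | some (gain, cur') =>
            pvSolveLoopB n colorof sizes nbrs fuel
              (PySem.Set.update region
                ((region.foldl (fun acc j => (nbrs.getD j []).foldl
                    (fun acc k => if k ∈ region then acc else PySem.Set.add acc k) acc) []).filter
                  (fun k => colorof.getD k 0 = cur')))
              (cells + gain) cur' (chosen ++ [cur'])
      else pvOutB chosen := rfl

-- the invariant tying A's (SEEN, grid) to B's (region, cells, cur)
def pvGInv (g : List (List Int)) (n : Int) (comp : PySem.Dict (Int × Int) Int)
    (region : List Int) (cells cur : Int) (SEEN : List (Int × Int))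
    (gridA : List (List Int)) : Prop :=
  SEEN.Nodup ∧ (((0 : Int), (0 : Int)) ∈ SEEN) ∧ (∀ x ∈ SEEN, pvInB n x) ∧
  gridA = pvPaint g SEEN cur ∧
  (∀ x, pvReach (pvGood gridA cur n) (fun z => z ∈ SEEN) x ↔
      (∃ k, comp.get? x = some k ∧ k ∈ region)) ∧
  cells = ((pvCells comp (fun v => decide (v ∈ region))).length : Int) ∧
  (((SEEN.length : Int) < n * n) ↔ (cells < n * n))

def pvTPred (region boundary : List Int) (colorof : PySem.Dict Int Int) (c v : Int) : Bool :=
  decide (v ∈ region) || (decide (v ∈ boundary) && decide (colorof.getD v 0 = c))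

-- the two greedy loops agree step by step
lemma pvLoopEqB (g : List (List Int)) (n : Int)
    (comp : PySem.Dict (Int × Int) Int) (colorof sizes : PySem.Dict Int Int)
    (nbrs : PySem.Dict Int (List Int))
    (hn2 : 2 ≤ n) (hs : pvShape g n)
    (hinv : pvLabInv g n comp colorof sizes)
    (hF1 : ∀ x, ((comp.get? x).isSome = true) ↔ pvInB n x)
    (hN1 : ∀ k j, (j ∈ nbrs.getD k []) ↔
      (k ≠ j ∧ ∃ x y, comp.get? x = some k ∧ comp.get? y = some j ∧ pvAdj x y)) :
    ∀ (fuel : Nat) (region : List Int) (cells cur : Int) (SEEN : List (Int × Int))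
      (gridA : List (List Int)) (chosen : List Int),
      pvGInv g n comp region cells cur SEEN gridA →
      pvSolveLoopA n fuel gridA SEEN (pvCountsOf chosen) ((chosen.length : Int))
        = pvSolveLoopB n colorof sizes nbrs fuel region cells cur chosen := by
  obtain ⟨hK1, hK2, hK3, hL4, hL5, hL6, hL7, hL8, hL9, hL10⟩ := hinv
  intro fuel
  induction fuel with
  | zero =>
      intro region cells cur SEEN gridA chosen hGI
      show ((chosen.length : Int), (pvCountsOf chosen).items) = pvOutB chosen
      rw [pvOutB_eq]
  | succ fuel ih =>
      intro region cells cur SEEN gridA chosen hGI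
      obtain ⟨i1a, i1b, i1c, i2, i3, i4, i5⟩ := hGI
      rw [pvSolveLoopA_succ, pvSolveLoopB_succ]
      by_cases hguard : cells < n * n
      · rw [if_pos hguard, if_pos ((i5.2 hguard))]
        have hposSEEN : ∀ x ∈ SEEN, 0 ≤ x.1 ∧ 0 ≤ x.2 := by
          intro x hx
          obtain ⟨h1, _, h3, _⟩ := i1c x hx
          exact ⟨h1, h3⟩
        have hsA : pvShape gridA n := by
          rw [i2]
          exact pvShape_paint hs SEEN cur hposSEEN
        have h00 : pvInB n (((0 : Int), (0 : Int))) := by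
          refine ⟨le_refl 0, by omega, le_refl 0, by omega⟩
        have hcur : pvAt gridA 0 0 = cur := by
          rw [i2]
          have := pvAt_paint hs SEEN cur hposSEEN h00
          simpa [i1b] using this
        rw [hcur]
        have hSNE : SEEN ≠ [] := List.ne_nil_of_mem i1b
        obtain ⟨hsc1, hsc2, hsc3, hsc4⟩ := pvBfs_spec gridA cur n SEEN hSNE i1a i1c
        set sc := pvBfs gridA cur SEEN n with hscdef
        have hscmem : ∀ x, x ∈ sc ↔ ∃ k, comp.get? x = some k ∧ k ∈ region :=
          fun x => (hsc4 x).trans (i3 x)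
        have hSEENreg : ∀ x ∈ SEEN, ∃ k, comp.get? x = some k ∧ k ∈ region :=
          fun x hx => (i3 x).1 (pvReach.base x hx)
        have hscNE : sc ≠ [] := List.ne_nil_of_mem (hsc1 _ i1b)
        set boundary := region.foldl (fun acc j => (nbrs.getD j []).foldl
          (fun acc k => if k ∈ region then acc else PySem.Set.add acc k) acc) []
          with hbdef
        have hbmem : ∀ k, k ∈ boundary ↔
            ((∃ j ∈ region, k ∈ nbrs.getD j []) ∧ k ∉ region) := by
          intro k
          rw [hbdef, pvBoundaryMem]
          constructor
          · rintro (h | ⟨j, hj, h1, h2⟩)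
            · simp at h
            · exact ⟨⟨j, hj, h1⟩, h2⟩
          · rintro ⟨⟨j, hj, h1⟩, h2⟩
            exact Or.inr ⟨j, hj, h1, h2⟩
        have hbnodup : boundary.Nodup := pvBoundaryNodup nbrs region region [] (by simp)
        have hbkeys : ∀ k ∈ boundary, k ∈ colorof.keys := by
          intro k hk
          obtain ⟨⟨j, _, hj⟩, _⟩ := (hbmem k).1 hk
          obtain ⟨_, x, y, _, hy, _⟩ := (hN1 j k).1 hj
          exact hL8 y k hy
        have hAtU : ∀ y : Int × Int, pvInB n y → y ∉ SEEN →
            pvAt gridA y.1 y.2 = pvAt g y.1 y.2 := by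
          intro y hyB hyS
          rw [i2, pvAt_paint hs SEEN cur hposSEEN hyB, if_neg hyS]
        have hnotSEEN : ∀ (y : Int × Int) (k : Int), comp.get? y = some k → k ∉ region →
            y ∉ SEEN := by
          intro y k hy hk hyS
          obtain ⟨k', hk', hk'r⟩ := hSEENreg y hyS
          rw [hy] at hk'
          injection hk' with hh
          exact hk (hh ▸ hk'r)
        set G : Int → Int := fun c => boundary.foldl
          (fun s k => if colorof.getD k 0 = c then s + sizes.getD k 0 else s) 0 with hGdef
        -- candidate flood for an arbitrary colour c
        have hcand : ∀ c : Int,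
            (∀ x, x ∈ pvBfs gridA c sc n ↔
              ∃ k, comp.get? x = some k ∧ pvTPred region boundary colorof c k = true) ∧
            (pvBfs gridA c sc n).Nodup ∧
            (∀ x ∈ sc, x ∈ pvBfs gridA c sc n) ∧
            (∀ x ∈ pvBfs gridA c sc n, pvInB n x) ∧
            (((pvBfs gridA c sc n).length : Int) = cells + G c) := by
          intro c
          obtain ⟨hc1, hc2, hc3, hc4⟩ := pvBfs_spec gridA c n sc hscNE hsc2 hsc3
          have hmem : ∀ x, x ∈ pvBfs gridA c sc n ↔
              ∃ k, comp.get? x = some k ∧ pvTPred region boundary colorof c k = true := by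
            intro x
            rw [hc4]
            constructor
            · -- reach ⊆ T, via closedness of the cell list of T
              intro hx
              have hsubm := pvReach_subset (S := pvCells comp (pvTPred region boundary colorof c))
                (good := pvGood gridA c n) (P := fun z => z ∈ sc) ?_ ?_ x hx
              · rcases (pvMem_cells comp hK1 _ x).1 hsubm with ⟨k, hk, hp⟩
                exact ⟨k, hk, hp⟩
              · intro z hz
                rcases (hscmem z).1 hz with ⟨k, hk, hkr⟩
                exact (pvMem_cells comp hK1 _ z).2 ⟨k, hk, by simp [pvTPred, hkr]⟩
              · intro z hz y hadj hgy
                rcases (pvMem_cells comp hK1 _ z).1 hz with ⟨kz, hkz, hpz⟩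
                rcases hky : comp.get? y with _ | ky
                · exfalso
                  have := (hF1 y).2 hgy.1
                  rw [hky] at this
                  simp at this
                · by_cases hkyr : ky ∈ region
                  · exact (pvMem_cells comp hK1 _ y).2 ⟨ky, hky, by simp [pvTPred, hkyr]⟩
                  · have hyS : y ∉ SEEN := hnotSEEN y ky hky hkyr
                    have hyAt : pvAt g y.1 y.2 = c := by
                      rw [← hAtU y hgy.1 hyS]
                      exact hgy.2
                    have hycol : colorof.getD ky 0 = c := by
                      rw [PySem.Dict.getD_eq_get?_getD, (hL4 y ky hky).2, hyAt]
                      rfl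
                    simp only [pvTPred, Bool.or_eq_true, Bool.and_eq_true,
                      decide_eq_true_eq] at hpz
                    rcases hpz with hpz | ⟨hpzb, hpzc⟩
                    · -- z's component is in the region: y's component is a boundary comp
                      have hne : kz ≠ ky := fun hh => hkyr (hh ▸ hpz)
                      have hnb : ky ∈ nbrs.getD kz [] :=
                        (hN1 kz ky).2 ⟨hne, z, y, hkz, hky, hadj⟩
                      refine (pvMem_cells comp hK1 _ y).2 ⟨ky, hky, ?_⟩
                      simp only [pvTPred, Bool.or_eq_true, Bool.and_eq_true,
                        decide_eq_true_eq]
                      exact Or.inr ⟨(hbmem ky).2 ⟨⟨kz, hpz, hnb⟩, hkyr⟩, hycol⟩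
                    · -- z is in a boundary comp of colour c: same colour, adjacent ⇒ same comp
                      have hzAt : pvAt g z.1 z.2 = c := by
                        have := (hL4 z kz hkz).2
                        rw [PySem.Dict.getD_eq_get?_getD, this] at hpzc
                        simpa using hpzc
                      have : comp.get? y = some kz :=
                        hL5 z y kz hkz hadj hgy.1 (by rw [hyAt, hzAt])
                      rw [hky] at this
                      injection this with hh
                      refine (pvMem_cells comp hK1 _ y).2 ⟨ky, hky, ?_⟩
                      simp only [pvTPred, Bool.or_eq_true, Bool.and_eq_true,
                        decide_eq_true_eq]
                      exact Or.inr ⟨hh ▸ hpzb, hycol⟩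
            · -- T ⊆ reach
              rintro ⟨k, hk, hp⟩
              simp only [pvTPred, Bool.or_eq_true, Bool.and_eq_true,
                decide_eq_true_eq] at hp
              rcases hp with hp | ⟨hpb, hpc⟩
              · exact pvReach.base x ((hscmem x).2 ⟨k, hk, hp⟩)
              · obtain ⟨⟨j, hjr, hjn⟩, hknr⟩ := (hbmem k).1 hpb
                obtain ⟨hne, u, w, hu, hw, hadj⟩ := (hN1 j k).1 hjn
                have hwB : pvInB n w := (hF1 w).1 (by rw [hw]; rfl)
                have hwS : w ∉ SEEN := hnotSEEN w k hw hknr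
                have hwAt : pvAt g w.1 w.2 = c := by
                  have := (hL4 w k hw).2
                  rw [PySem.Dict.getD_eq_get?_getD, this] at hpc
                  simpa using hpc
                have hwG : pvGood gridA c n w := ⟨hwB, by rw [hAtU w hwB hwS]; exact hwAt⟩
                have hureach : pvReach (pvGood gridA c n) (fun z => z ∈ sc) u :=
                  pvReach.base u ((hscmem u).2 ⟨j, hu, hjr⟩)
                have hwreach : pvReach (pvGood gridA c n) (fun z => z ∈ sc) w :=
                  pvReach.step u w hureach hadj hwG
                -- walk inside the component from w to x
                have horig := hL6 w x k hw hk
                rw [hwAt] at horig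
                have htrans : ∀ z, pvReach (pvGood g c n) (fun q => q = w) z →
                    comp.get? z = some k ∧ pvReach (pvGood gridA c n) (fun q => q ∈ sc) z := by
                  intro z hz
                  induction hz with
                  | base z hzz => exact hzz ▸ ⟨hw, hwreach⟩
                  | step z z' hr hadj' hg' ihz =>
                      obtain ⟨ihz1, ihz2⟩ := ihz
                      have hz'comp : comp.get? z' = some k := by
                        apply hL5 z z' k ihz1 hadj' hg'.1
                        rw [hg'.2]
                        have hzAt : pvAt g z.1 z.2 = c := by
                          have := (hL4 z k ihz1).2
                          rw [PySem.Dict.getD_eq_get?_getD, this] at hpc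
                          simpa using hpc
                        rw [hzAt]
                      have hz'S : z' ∉ SEEN := hnotSEEN z' k hz'comp hknr
                      have hz'G : pvGood gridA c n z' :=
                        ⟨hg'.1, by rw [hAtU z' hg'.1 hz'S]; exact hg'.2⟩
                      exact ⟨hz'comp, pvReach.step z z' ihz2 hadj' hz'G⟩
                exact (htrans x horig).2
          refine ⟨hmem, hc2, hc1, hc3, ?_⟩
          -- the length of the candidate
          have hlen1 : (pvBfs gridA c sc n).length
              = (pvCells comp (pvTPred region boundary colorof c)).length := by
            apply pvLenEq hc2 (pvCells_nodup comp hK1 _)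
            intro x
            rw [hmem, pvMem_cells comp hK1]
          have hsplit : (pvCells comp (pvTPred region boundary colorof c)).length
              = (pvCells comp (fun v => decide (v ∈ region))).length
                + (pvCells comp (fun v => decide (v ∈ boundary)
                    && decide (colorof.getD v 0 = c))).length := by
            have := pvCells_length_or comp (fun v => decide (v ∈ region))
              (fun v => decide (v ∈ boundary) && decide (colorof.getD v 0 = c))
              (by
                rintro v ⟨h1, h2⟩
                simp only [decide_eq_true_eq, Bool.and_eq_true] at h1 h2
                exact ((hbmem v).1 h2.1).2 h1)
            exact this
          have hfilter : (pvCells comp (fun v => decide (v ∈ boundary)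
              && decide (colorof.getD v 0 = c)))
              = pvCells comp (fun v =>
                  decide (v ∈ boundary.filter (fun k => decide (colorof.getD k 0 = c)))) := by
            apply pvCells_congr
            intro v
            simp [List.mem_filter]
          have hgain : G c = ((pvCells comp (fun v => decide (v ∈ boundary)
              && decide (colorof.getD v 0 = c))).length : Int) := by
            rw [hGdef]
            simp only
            rw [pvFoldl_sum_if (fun k => colorof.getD k 0 = c) (fun k => sizes.getD k 0)
              boundary 0, zero_add]
            have hmapsum : ∀ k ∈ boundary.filter (fun k => decide (colorof.getD k 0 = c)),
                sizes.getD k 0 = ((pvCells comp (fun v => decide (v = k))).length : Int) := by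
              intro k hk
              have hk' : k ∈ boundary := (List.mem_filter.1 hk).1
              rw [PySem.Dict.getD_eq_get?_getD, hL7 k (hbkeys k hk')]
              rfl
            rw [List.map_congr_left hmapsum]
            rw [pvCells_length_sum comp _ (List.Nodup.filter _ hbnodup), hfilter]
          rw [hlen1]
          push_cast [hsplit]
          rw [i4, hgain]
        -- A's candidate list and its sorted head
        rw [pvFoldl_append_if cur (fun c => (c, pvBfs gridA c sc n)) (PySem.List.pyRange 1 7) []]
        simp only [List.nil_append]
        set cs := (PySem.List.pyRange 1 7).filter (fun x => x ≠ cur) with hcs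
        obtain ⟨c1, rest, hcs1⟩ : ∃ c1 rest, cs = c1 :: rest := by
          rcases hcase : cs with _ | ⟨c1, rest⟩
          · exact absurd hcase (pvCs_ne cur)
          · exact ⟨c1, rest, rfl⟩
        -- B's running maximum over the same colours
        have hBstep : (fun (best : Option (Int × Int)) (color : Int) =>
            if color ≠ cur then
              let gain := boundary.foldl
                (fun s k => if colorof.getD k 0 = color then s + sizes.getD k 0 else s) 0
              match best with
              | none => some (gain, color)
              | some b => if b.1 < gain then some (gain, color) else best
            else best)
            = (fun best color =>
              if color ≠ cur then
                match best with
                | none => some (G color, color)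
                | some b => if b.1 < G color then some (G color, color) else best
              else best) := rfl
        rw [hBstep, pvFoldl_step_if cur _ (PySem.List.pyRange 1 7)
          (none : Option (Int × Int)), ← hcs, hcs1]
        have hpairs := pvCs_pairwise cur
        rw [← hcs, hcs1, List.pairwise_cons] at hpairs
        obtain ⟨b', hb1, hb2, hb3, hb4, hb5, hb6⟩ :=
          pvBestFoldB G rest (G c1, c1) rfl (fun c' hc' => hpairs.1 c' hc') hpairs.2
        have hfold : (c1 :: rest).foldl (fun best color =>
              match best with
              | none => some (G color, color)
              | some b => if b.1 < G color then some (G color, color) else best)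
            (none : Option (Int × Int)) = some b' := by
          rw [List.foldl_cons]
          show rest.foldl (fun best color =>
              match best with
              | none => some (G color, color)
              | some b => if b.1 < G color then some (G color, color) else best)
            (some (G c1, c1)) = some b'
          exact hb1
        have hbestAll : ∀ c ∈ cs, c = b'.2 ∨ G c < b'.1 ∨ (G c = b'.1 ∧ b'.2 < c) := by
          intro c hc
          rw [hcs1] at hc
          rcases List.mem_cons.1 hc with rfl | hc'
          · by_cases hb : b'.2 = c
            · exact Or.inl hb.symm
            · right; left
              have := hb5 hb
              simp only at this hb4
              omega
          · exact hb6 c hc'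
        have hb'cs : b'.2 ∈ cs := by
          rw [hcs1]
          rcases hb3 with rfl | hmem
          · exact List.mem_cons_self
          · exact List.mem_cons_of_mem _ hmem
        -- A's sorted head
        rcases hsort : PySem.List.sorted2 (cs.map (fun c => (c, pvBfs gridA c sc n)))
            (fun x => -(x.2.length : Int)) (fun x => x.1) with _ | ⟨⟨cm, sm⟩, t⟩
        · exfalso
          have hperm := PySem.List.sorted2_perm (cs.map (fun c => (c, pvBfs gridA c sc n)))
            (fun x => -(x.2.length : Int)) (fun x => x.1) false
          rw [hsort] at hperm
          have := hperm.symm.eq_nil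
          rw [hcs1] at this
          simp at this
        obtain ⟨hmemm, hminm⟩ := pvHead_min _ _ _ hsort
        obtain ⟨cm', hcm'cs, hcm'⟩ := List.mem_map.1 hmemm
        have hcmeq : cm' = cm := congrArg Prod.fst hcm'
        have hsm : sm = pvBfs gridA cm sc n := by
          have := congrArg Prod.snd hcm'
          simp only at this
          rw [← this, hcmeq]
        have hcmcs : cm ∈ cs := hcmeq ▸ hcm'cs
        have hkey := hminm (b'.2, pvBfs gridA b'.2 sc n) (List.mem_map.2 ⟨b'.2, hb'cs, rfl⟩)
        rw [pvLex_false_iff] at hkey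
        simp only at hkey
        have hlen_cm := (hcand cm).2.2.2.2
        have hlen_b' := (hcand b'.2).2.2.2.2
        have hcmb : cm = b'.2 := by
          rcases hbestAll cm hcmcs with h | h | h
          · exact h
          · exfalso
            rw [hsm] at hkey
            rw [hb2] at h
            omega
          · exfalso
            rw [hsm] at hkey
            rw [hb2] at h
            omega
        -- the chosen colour and its absorbed component set
        obtain ⟨gB, cB⟩ := b'
        rw [hcs1] at hsort
        have hgB : gB = G cm := by
          rw [hcmb]
          exact hb2
        have hcmrange := (pvCs_mem cur cm).1 hcmcs
        have hpossm : ∀ x ∈ sm, 0 ≤ x.1 ∧ 0 ≤ x.2 := by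
          intro x hx
          rw [hsm] at hx
          obtain ⟨h1, _, h3, _⟩ := (hcand cm).2.2.2.1 x hx
          exact ⟨h1, h3⟩
        have hsub : ∀ x ∈ SEEN, x ∈ sm := by
          intro x hx
          rw [hsm]
          exact (hcand cm).2.2.1 x (hsc1 x hx)
        have hpaint : pvPaint gridA sm cm = pvPaint g sm cm := by
          rw [i2]
          exact pvPaint_paint g SEEN sm cur cm hposSEEN hpossm hsub
        have hcounts : (pvCountsOf chosen).insert cm ((pvCountsOf chosen).getD cm 0 + 1)
            = pvCountsOf (chosen ++ [cm]) :=
          pvCounts_insert chosen cm hcmrange.1 hcmrange.2.1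
        have hmv : (chosen.length : Int) + 1 = (((chosen ++ [cm]).length : Nat) : Int) := by
          simp
        set region' := PySem.Set.update region
          (boundary.filter (fun k => decide (colorof.getD k 0 = cm))) with hregdef
        have hreg' : ∀ k, (k ∈ region') ↔ pvTPred region boundary colorof cm k = true := by
          intro k
          rw [hregdef, pvMemUpdateI, List.mem_filter]
          simp only [pvTPred, Bool.or_eq_true, Bool.and_eq_true, decide_eq_true_eq]
        have hsmmem : ∀ x, x ∈ sm ↔ ∃ k, comp.get? x = some k ∧ k ∈ region' := by
          intro x
          rw [hsm, (hcand cm).1 x]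
          constructor
          · rintro ⟨k, hk, hp⟩
            exact ⟨k, hk, (hreg' k).2 hp⟩
          · rintro ⟨k, hk, hp⟩
            exact ⟨k, hk, (hreg' k).1 hp⟩
        have hregsub : ∀ k ∈ region, k ∈ region' := by
          intro k hk
          rw [hregdef, pvMemUpdateI]
          exact Or.inl hk
        -- the new invariant
        have hINV : pvGInv g n comp region' (cells + G cm) cm sm (pvPaint g sm cm) := by
          refine ⟨by rw [hsm]; exact (hcand cm).2.1, hsub _ i1b,
            by rw [hsm]; exact (hcand cm).2.2.2.1, rfl, ?_, ?_, ?_⟩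
          · -- flooded closure of the new SEEN is exactly the new region's cells
            intro x
            constructor
            · intro hx
              have hxin := pvReach_subset (S := sm) (good := pvGood (pvPaint g sm cm) cm n)
                (P := fun z => z ∈ sm) (fun z hz => hz) ?_ x hx
              · exact (hsmmem x).1 hxin
              · intro z hz y hadj hgy
                by_contra hyn
                have hyAt : pvAt g y.1 y.2 = cm := by
                  have := pvAt_paint hs sm cm hpossm hgy.1 (g := g)
                  rw [if_neg hyn] at this
                  rw [← this]
                  exact hgy.2
                rcases hky : comp.get? y with _ | ky
                · have := (hF1 y).2 hgy.1
                  rw [hky] at this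
                  simp at this
                have hkycol : colorof.getD ky 0 = cm := by
                  rw [PySem.Dict.getD_eq_get?_getD, (hL4 y ky hky).2, hyAt]
                  rfl
                have hkynot : ky ∉ region' := by
                  intro hh
                  exact hyn ((hsmmem y).2 ⟨ky, hky, hh⟩)
                rcases (hsmmem z).1 hz with ⟨kz, hkz, hkzr⟩
                rcases (hreg' kz).1 hkzr with hkzTP
                simp only [pvTPred, Bool.or_eq_true, Bool.and_eq_true,
                  decide_eq_true_eq] at hkzTP
                rcases hkzTP with hzreg | ⟨hzb, hzc⟩
                · have hne : kz ≠ ky := by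
                    intro hh
                    exact hkynot (hh ▸ hregsub kz hzreg)
                  have hnb : ky ∈ nbrs.getD kz [] :=
                    (hN1 kz ky).2 ⟨hne, z, y, hkz, hky, hadj⟩
                  have hkynr : ky ∉ region := fun hh => hkynot (hregsub ky hh)
                  apply hkynot
                  rw [hreg' ky]
                  simp only [pvTPred, Bool.or_eq_true, Bool.and_eq_true, decide_eq_true_eq]
                  exact Or.inr ⟨(hbmem ky).2 ⟨⟨kz, hzreg, hnb⟩, hkynr⟩, hkycol⟩
                · have hzAt : pvAt g z.1 z.2 = cm := by
                    have := (hL4 z kz hkz).2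
                    rw [PySem.Dict.getD_eq_get?_getD, this] at hzc
                    simpa using hzc
                  have : comp.get? y = some kz :=
                    hL5 z y kz hkz hadj hgy.1 (by rw [hyAt, hzAt])
                  rw [hky] at this
                  injection this with hh
                  exact hkynot (hh ▸ hkzr)
            · rintro ⟨k, hk, hkr⟩
              exact pvReach.base x ((hsmmem x).2 ⟨k, hk, hkr⟩)
          · -- the cell count of the new region
            have h1 := (hcand cm).2.2.2.2
            rw [← hsm] at h1
            rw [← h1]
            congr 1
            apply pvLenEq (by rw [hsm]; exact (hcand cm).2.1) (pvCells_nodup comp hK1 _)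
            intro x
            rw [hsmmem x, pvMem_cells comp hK1]
            constructor
            · rintro ⟨k, hk, hp⟩
              exact ⟨k, hk, by simpa using hp⟩
            · rintro ⟨k, hk, hp⟩
              exact ⟨k, hk, by simpa using hp⟩
          · have h1 := (hcand cm).2.2.2.2
            rw [← hsm] at h1
            rw [h1]
        have hstep := ih region' (cells + G cm) cm sm (pvPaint g sm cm) (chosen ++ [cm]) hINV
        rw [hsort, hfold]
        show pvSolveLoopA n fuel (pvPaint gridA sm cm) sm
            ((pvCountsOf chosen).insert cm ((pvCountsOf chosen).getD cm 0 + 1))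
            ((chosen.length : Int) + 1)
          = pvSolveLoopB n colorof sizes nbrs fuel
            (PySem.Set.update region (boundary.filter (fun k => decide (colorof.getD k 0 = cB))))
            (cells + gB) cB (chosen ++ [cB])
        have hcmb' : cm = cB := hcmb
        rw [← hcmb', hgB, hpaint, hcounts, hmv]
        exact hstep
      · rw [if_neg hguard, if_neg (fun hh => hguard (i5.1 hh))]
        show ((chosen.length : Int), (pvCountsOf chosen).items) = pvOutB chosen
        rw [pvOutB_eq]

-- ---- the degenerate board and the head colour of the grid ----
lemma pvHeadAt (grid : List (List Int)) (n : Int) (hn2 : 2 ≤ n)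
    (hlen : (grid.length : Int) = n) :
    (grid.headD []).headD 0 = pvAt grid 0 0 := by
  unfold pvAt
  rw [PySem.List.pyGetD_of_nonneg _ _ (le_refl 0), PySem.List.pyGetD_of_nonneg _ _ (le_refl 0)]
  rcases grid with _ | ⟨r, t⟩
  · simp at hlen
    omega
  · rcases r with _ | ⟨v, w⟩ <;> simp [List.getD]

-- ===== VERDICT (by name: the statement is the Claim_ definition above) =====
theorem solve_spec : Claim_unchanged_solve := by
  unfold Claim_unchanged_solve
  intro grid n _ hpre
  unfold Spec_solve
  intro hnd
  rcases hpre with hsmall | ⟨hn2, hlen, hrow, _⟩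
  · have hn1 : n ≤ 1 := by nlinarith
    unfold solve_alt
    rw [if_pos hn1]
    unfold solve
    rw [pvSolveLoopA_succ]
    have hg : ¬ ((([((0 : Int), (0 : Int))] : List (Int × Int)).length : Int) < n * n) := by
      simp only [List.length_cons, List.length_nil]
      push_cast
      omega
    rw [if_neg hg]
    rfl
  · have hn0 : 0 ≤ n := by omega
    have hs : pvShape grid n := ⟨hlen, hrow⟩
    obtain ⟨hinv, hF1⟩ := pvLabelAll_spec grid n hn0
    have hN1 := pvNbrsAll_spec (pvLabelAll grid n).1 (pvLabelAll grid n).2.1 n hF1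
    obtain ⟨hK1, hK2, hK3, hL4, hL5, hL6, hL7, hL8, hL9, hL10⟩ := hinv
    unfold solve solve_alt
    rw [if_neg (by omega : ¬ n ≤ 1)]
    show pvSolveLoopA n ((n * n).toNat + 1) grid [((0 : Int), (0 : Int))] pvCountsA0 0
        = pvSolveLoopB n (pvLabelAll grid n).2.1 (pvLabelAll grid n).2.2
            (pvNbrsAll (pvLabelAll grid n).1 (pvLabelAll grid n).2.1 n) ((n * n).toNat + 1)
            [(pvLabelAll grid n).1.getD ((0 : Int), (0 : Int)) 0]
            ((pvLabelAll grid n).2.2.getD ((pvLabelAll grid n).1.getD ((0 : Int), (0 : Int)) 0) 0)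
            ((pvLabelAll grid n).2.1.getD ((pvLabelAll grid n).1.getD ((0 : Int), (0 : Int)) 0) 0)
            []
    have h00 : pvInB n (((0 : Int), (0 : Int))) :=
      ⟨le_refl 0, by omega, le_refl 0, by omega⟩
    set comp := (pvLabelAll grid n).1 with hcompdef
    set colorof := (pvLabelAll grid n).2.1 with hcolorofdef
    set sizes := (pvLabelAll grid n).2.2 with hsizesdef
    set k0 := comp.getD ((0 : Int), (0 : Int)) 0 with hk0def
    have hk0 : comp.get? ((0 : Int), (0 : Int)) = some k0 := by
      rcases hv : comp.get? ((0 : Int), (0 : Int)) with _ | v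
      · exfalso
        have := (hF1 _).2 h00
        rw [hv] at this
        simp at this
      · rw [hk0def, PySem.Dict.getD_eq_get?_getD, hv]
        rfl
    set cur0 := colorof.getD k0 0 with hcur0def
    have hcur0 : cur0 = pvAt grid 0 0 := by
      rw [hcur0def, PySem.Dict.getD_eq_get?_getD, (hL4 _ _ hk0).2]
      rfl
    set cells0 := sizes.getD k0 0 with hcells0def
    have hcells0 : cells0
        = ((pvCells comp (fun v => decide (v ∈ ([k0] : List Int)))).length : Int) := by
      rw [hcells0def, PySem.Dict.getD_eq_get?_getD, hL7 k0 (hL8 _ _ hk0)]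
      rw [pvCells_congr comp _ (fun v => decide (v ∈ ([k0] : List Int)))
        (by intro v; simp)]
      rfl
    have hpaint0 : grid = pvPaint grid [((0 : Int), (0 : Int))] cur0 := by
      symm
      have hpos : ∀ x ∈ ([((0 : Int), (0 : Int))] : List (Int × Int)), 0 ≤ x.1 ∧ 0 ≤ x.2 := by
        intro x hx
        simp only [List.mem_singleton] at hx
        subst hx
        exact ⟨le_refl 0, le_refl 0⟩
      apply pvGridExt
      · exact pvPaint_length _ _ _ hpos
      · exact pvPaint_rowlen _ _ _ hpos
      · intro i j
        rw [pvPaint_get2? _ _ _ hpos i j]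
        split_ifs with h
        · obtain ⟨h1, h2⟩ := h
          have hij : i = 0 ∧ j = 0 := by
            simp only [List.mem_singleton, Prod.mk.injEq] at h1
            omega
          obtain ⟨rfl, rfl⟩ := hij
          have := pvAt_get2 hs h00
          simp only [Int.toNat_zero] at this
          rw [this, hcur0]
        · rfl
    -- the cells of k0 are exactly the flood of (0,0)
    have hreach0 : ∀ x, pvReach (pvGood grid cur0 n)
        (fun z => z ∈ ([((0 : Int), (0 : Int))] : List (Int × Int))) x ↔
        (∃ k, comp.get? x = some k ∧ k ∈ ([k0] : List Int)) := by
      intro x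
      constructor
      · intro hx
        have hmem := pvReach_subset (S := pvCells comp (fun v => decide (v = k0)))
          (good := pvGood grid cur0 n)
          (P := fun z => z ∈ ([((0 : Int), (0 : Int))] : List (Int × Int))) ?_ ?_ x hx
        · rcases (pvMem_cells comp hK1 _ x).1 hmem with ⟨k, hk, hp⟩
          simp only [decide_eq_true_eq] at hp
          exact ⟨k, hk, by simp [hp]⟩
        · intro z hz
          simp only [List.mem_singleton] at hz
          subst hz
          exact (pvMem_cells comp hK1 _ _).2 ⟨k0, hk0, by simp⟩
        · intro z hz y hadj hgy
          rcases (pvMem_cells comp hK1 _ z).1 hz with ⟨k, hk, hp⟩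
          simp only [decide_eq_true_eq] at hp
          rw [hp] at hk
          have hzAt : pvAt grid z.1 z.2 = cur0 := by
            have e1 := (hL4 z k0 hk).2
            have e2 := (hL4 _ _ hk0).2
            rw [e1] at e2
            injection e2 with hh
            rw [hcur0]
            exact hh
          have := hL5 z y k0 hk hadj hgy.1 (by rw [hgy.2, hzAt])
          exact (pvMem_cells comp hK1 _ y).2 ⟨k0, this, by simp⟩
      · rintro ⟨k, hk, hkr⟩
        simp only [List.mem_singleton] at hkr
        rw [hkr] at hk
        have := hL6 ((0 : Int), (0 : Int)) x k0 hk0 hk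
        have hAt0 : pvAt grid ((0 : Int), (0 : Int)).1 ((0 : Int), (0 : Int)).2 = cur0 :=
          hcur0.symm
        rw [hAt0] at this
        exact pvReach_congr (fun z => by simp) x this
    -- the board is not monochromatic: the first component misses a cell
    have hcellslt : cells0 < n * n := by
      have hnd' : ∃ row ∈ grid, ∃ v ∈ row, v ≠ (grid.headD []).headD 0 := by
        by_contra hcon
        push_neg at hcon
        exact hnd ⟨hn2, hcon⟩
      obtain ⟨row, hrowm, v, hvm, hvne⟩ := hnd'
      obtain ⟨i, hi, rfl⟩ := List.getElem_of_mem hrowm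
      obtain ⟨j, hj, rfl⟩ := List.getElem_of_mem hvm
      have hiB : (i : Int) < n := by
        rw [← hlen]
        exact_mod_cast hi
      have hjB : (j : Int) < n := by
        have := hrow _ (List.getElem_mem hi)
        omega
      have hxB : pvInB n (((i : Int), (j : Int))) :=
        ⟨Int.natCast_nonneg i, hiB, Int.natCast_nonneg j, hjB⟩
      have hxAt : pvAt grid ((i : Int)) ((j : Int)) = grid[i][j] := by
        unfold pvAt
        rw [PySem.List.pyGetD_natCast, PySem.List.pyGetD_natCast,
          List.getD_eq_getElem _ _ hi, List.getD_eq_getElem _ _ hj]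
      have hxk : comp.get? (((i : Int), (j : Int))) ≠ some k0 := by
        intro hh
        have e1 := (hL4 _ _ hh).2
        have e2 := (hL4 _ _ hk0).2
        rw [e1] at e2
        injection e2 with e3
        apply hvne
        rw [pvHeadAt grid n hn2 hlen, ← hxAt]
        simp only at e3
        rw [e3]
      have hxnot : (((i : Int), (j : Int))) ∉ pvCells comp
          (fun v => decide (v ∈ ([k0] : List Int))) := by
        intro hh
        rcases (pvMem_cells comp hK1 _ _).1 hh with ⟨k, hk, hp⟩
        simp only [List.mem_singleton, decide_eq_true_eq] at hp
        rw [hp] at hk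
        exact hxk hk
      have hcard := pvCardLt (n := n) (pvCells_nodup comp hK1 _)
        (by
          intro x hx
          rcases (pvMem_cells comp hK1 _ x).1 hx with ⟨k, hk, _⟩
          exact (hL4 x k hk).1) hxB hxnot
      have hNN : n * n = ((n.toNat * n.toNat : Nat) : Int) := by
        push_cast [Int.toNat_of_nonneg hn0]
        ring
      rw [hcells0, hNN]
      exact_mod_cast hcard
    have hguard1 : ((([((0 : Int), (0 : Int))] : List (Int × Int)).length : Int) < n * n)
        ↔ (cells0 < n * n) := by
      simp only [List.length_cons, List.length_nil]
      constructor
      · intro _; exact hcellslt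
      · intro _
        push_cast
        nlinarith
    have hINV : pvGInv grid n comp [k0] cells0 cur0 [((0 : Int), (0 : Int))] grid := by
      refine ⟨by simp, by simp, ?_, hpaint0, hreach0, hcells0, hguard1⟩
      intro x hx
      simp only [List.mem_singleton] at hx
      subst hx
      exact h00
    have := pvLoopEqB grid n comp colorof sizes (pvNbrsAll comp colorof n) hn2 hs
      ⟨hK1, hK2, hK3, hL4, hL5, hL6, hL7, hL8, hL9, hL10⟩ hF1 hN1
      ((n * n).toNat + 1) [k0] cells0 cur0 [((0 : Int), (0 : Int))] grid [] hINV
    rw [pvCountsA0_eq]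
    exact this

theorem solve_changed : Claim_changed_solve := by
  unfold Claim_changed_solve; decide

-- ---- tightness: on a monochromatic board A spends one move, B none ----
lemma pvScanNodupAux (m : List Int) (hm : m.Nodup) :
    ∀ (l : List Int), l.Nodup →
      (l.flatMap (fun r => m.map (fun c => (r, c)))).Nodup := by
  intro l
  induction l with
  | nil => intro _; simp
  | cons r t ih =>
      intro hl
      rw [List.nodup_cons] at hl
      rw [List.flatMap_cons]
      refine List.Nodup.append ?_ (ih hl.2) ?_
      · exact List.Nodup.map (fun a b hab => by injection hab) hm
      · intro p hp hq
        rcases List.mem_map.1 hp with ⟨c, _, rfl⟩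
        rcases List.mem_flatMap.1 hq with ⟨r', hr', hmem⟩
        rcases List.mem_map.1 hmem with ⟨c', _, heq⟩
        injection heq with e1 e2
        exact hl.1 (e1 ▸ hr')

lemma pvScanNodup (n : Int) : (pvScanCells n).Nodup :=
  pvScanNodupAux _ (PySem.List.nodup_pyRange_one 0 n) _ (PySem.List.nodup_pyRange_one 0 n)

lemma pvScanLen (n : Int) (hn : 0 ≤ n) :
    ((pvScanCells n).length : Int) = n * n := by
  unfold pvScanCells
  have hflat : ∀ (l : List Int),
      (l.flatMap (fun r => (PySem.List.pyRange 0 n).map (fun c => (r, c)))).length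
        = l.length * (PySem.List.pyRange 0 n).length := by
    intro l
    induction l with
    | nil => simp
    | cons r t ih =>
        rw [List.flatMap_cons, List.length_append, ih]
        simp [Nat.succ_mul]
        omega
  rw [hflat]
  simp only [PySem.List.length_pyRange_one]
  push_cast [Int.toNat_of_nonneg (by omega : (0 : Int) ≤ n - 0)]
  ring

theorem solve_tight : Claim_exact_solve := by
  unfold Claim_exact_solve
  intro grid n _ hpre hd
  obtain ⟨hn2, hmono⟩ := hd
  rcases hpre with hsmall | ⟨_, hlen, hrow, _⟩
  · exfalso; nlinarith
  have hn0 : 0 ≤ n := by omega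
  have hs : pvShape grid n := ⟨hlen, hrow⟩
  obtain ⟨hinv, hF1⟩ := pvLabelAll_spec grid n hn0
  obtain ⟨hK1, hK2, hK3, hL4, hL5, hL6, hL7, hL8, hL9, hL10⟩ := hinv
  have h00 : pvInB n (((0 : Int), (0 : Int))) := ⟨le_refl 0, by omega, le_refl 0, by omega⟩
  set col0 := pvAt grid 0 0 with hcol0def
  -- every cell carries the colour of the first cell
  have hAt : ∀ x : Int × Int, pvInB n x → pvAt grid x.1 x.2 = col0 := by
    intro x hx
    obtain ⟨h1, h2, h3, h4⟩ := hx
    have hi : x.1.toNat < grid.length := by omega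
    have hrowl := hrow _ (List.getElem_mem hi)
    have hj : x.2.toNat < (grid[x.1.toNat]).length := by omega
    have hxv : pvAt grid x.1 x.2 = grid[x.1.toNat][x.2.toNat] := by
      unfold pvAt
      rw [PySem.List.pyGetD_of_nonneg _ _ h1, PySem.List.pyGetD_of_nonneg _ _ h3,
        List.getD_eq_getElem _ _ hi, List.getD_eq_getElem _ _ hj]
    rw [hxv, hmono _ (List.getElem_mem hi) _ (List.getElem_mem hj),
      pvHeadAt grid n hn2 hlen]
  -- the whole board is one flooded component
  have hreachAll : ∀ x : Int × Int, pvInB n x →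
      pvReach (pvGood grid col0 n) (fun z => z = ((0 : Int), (0 : Int))) x := by
    have hgood : ∀ x : Int × Int, pvInB n x → pvGood grid col0 n x :=
      fun x hx => ⟨hx, hAt x hx⟩
    have hrow0 : ∀ i : Nat, (i : Int) < n →
        pvReach (pvGood grid col0 n) (fun z => z = ((0 : Int), (0 : Int)))
          (((i : Int)), (0 : Int)) := by
      intro i
      induction i with
      | zero => intro _; exact pvReach.base _ (by norm_num)
      | succ i ihi =>
          intro hi
          have hstep : pvAdj (((i : Int)), (0 : Int)) ((((i + 1 : Nat) : Int)), (0 : Int)) := by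
            right; right; left
            push_cast
            rfl
          refine pvReach.step _ _ (ihi (by push_cast at hi ⊢; omega)) hstep
            (hgood _ ⟨by positivity, by push_cast at hi ⊢; omega, le_refl 0, by omega⟩)
    have hcell : ∀ i : Nat, (i : Int) < n → ∀ j : Nat, (j : Int) < n →
        pvReach (pvGood grid col0 n) (fun z => z = ((0 : Int), (0 : Int)))
          (((i : Int)), ((j : Int))) := by
      intro i hi j
      induction j with
      | zero => intro _; exact hrow0 i hi
      | succ j ihj =>
          intro hj
          have hstep : pvAdj (((i : Int)), ((j : Int))) (((i : Int)), (((j + 1 : Nat) : Int))) := by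
            left
            push_cast
            rfl
          refine pvReach.step _ _ (ihj (by push_cast at hj ⊢; omega)) hstep
            (hgood _ ⟨by positivity, hi, by positivity, hj⟩)
    intro x hx
    obtain ⟨h1, h2, h3, h4⟩ := hx
    have hx' : x = (((x.1.toNat : Nat) : Int), ((x.2.toNat : Nat) : Int)) := by
      obtain ⟨a, b⟩ := x
      simp only [Prod.mk.injEq]
      omega
    rw [hx']
    exact hcell x.1.toNat (by omega) x.2.toNat (by omega)
  set comp := (pvLabelAll grid n).1 with hcompdef
  set colorof := (pvLabelAll grid n).2.1 with hcolorofdef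
  set sizes := (pvLabelAll grid n).2.2 with hsizesdef
  set k0 := comp.getD ((0 : Int), (0 : Int)) 0 with hk0def
  have hk0 : comp.get? ((0 : Int), (0 : Int)) = some k0 := by
    rcases hv : comp.get? ((0 : Int), (0 : Int)) with _ | v
    · exfalso
      have := (hF1 _).2 h00
      rw [hv] at this
      simp at this
    · rw [hk0def, PySem.Dict.getD_eq_get?_getD, hv]
      rfl
  -- every in-bounds cell is in component k0
  have hcompAll : ∀ x : Int × Int, pvInB n x → comp.get? x = some k0 := by
    intro x hx
    have hmem := pvReach_subset (S := pvCells comp (fun v => decide (v = k0)))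
      (good := pvGood grid col0 n) (P := fun z => z = ((0 : Int), (0 : Int))) ?_ ?_ x
      (hreachAll x hx)
    · rcases (pvMem_cells comp hK1 _ x).1 hmem with ⟨k, hk, hp⟩
      simp only [decide_eq_true_eq] at hp
      rw [hp] at hk
      exact hk
    · intro z hz
      rw [hz]
      exact (pvMem_cells comp hK1 _ _).2 ⟨k0, hk0, by simp⟩
    · intro z hz y hadj hgy
      rcases (pvMem_cells comp hK1 _ z).1 hz with ⟨k, hk, hp⟩
      simp only [decide_eq_true_eq] at hp
      rw [hp] at hk
      have := hL5 z y k0 hk hadj hgy.1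
        (by rw [hgy.2, hAt z (hL4 z k0 hk).1])
      exact (pvMem_cells comp hK1 _ y).2 ⟨k0, this, by simp⟩
  -- hence the component has all n*n cells
  have hcellsfull : ∀ (p : Int → Bool), (∀ v, p v = decide (v = k0)) →
      ((pvCells comp p).length : Int) = n * n := by
    intro p hp
    have hmem : ∀ x, x ∈ pvCells comp p ↔ x ∈ pvScanCells n := by
      intro x
      rw [pvMem_cells comp hK1, pvMem_scan]
      constructor
      · rintro ⟨k, hk, _⟩
        exact (hL4 x k hk).1
      · intro hx
        exact ⟨k0, hcompAll x hx, by rw [hp]; simp⟩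
    have hlen2 := pvLenEq (pvCells_nodup comp hK1 p) (pvScanNodup n) hmem
    rw [← pvScanLen n hn0, hlen2]
  -- B returns 0 moves
  have hB : solve_alt grid n = pvOutB [] := by
    unfold solve_alt
    rw [if_neg (by omega : ¬ n ≤ 1)]
    show pvSolveLoopB n colorof sizes (pvNbrsAll comp colorof n) ((n * n).toNat + 1)
        [k0] (sizes.getD k0 0) (colorof.getD k0 0) [] = pvOutB []
    rw [pvSolveLoopB_succ]
    have hc0 : sizes.getD k0 0 = n * n := by
      rw [PySem.Dict.getD_eq_get?_getD, hL7 k0 (hL8 _ _ hk0)]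
      simp only [Option.getD_some]
      exact hcellsfull _ (fun v => rfl)
    rw [if_neg (by rw [hc0]; omega)]
  -- A plays exactly one move
  have hA : (solve grid n).1 = 1 := by
    unfold solve
    rw [pvSolveLoopA_succ]
    rw [if_pos (by simp only [List.length_cons, List.length_nil]; push_cast; nlinarith)]
    obtain ⟨hsc1, hsc2, hsc3, hsc4⟩ :=
      pvBfs_spec grid (pvAt grid 0 0) n [((0 : Int), (0 : Int))] (by simp) (by simp)
        (by intro x hx; simp only [List.mem_singleton] at hx; rw [hx]; exact h00)
    set sc := pvBfs grid (pvAt grid 0 0) [((0 : Int), (0 : Int))] n with hscdef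
    have hscmem : ∀ x, x ∈ sc ↔ pvInB n x := by
      intro x
      rw [hsc4]
      constructor
      · intro hx
        exact (pvReach_good ⟨h00, rfl⟩
          (pvReach_congr (P := fun z => z ∈ ([((0 : Int), (0 : Int))] : List (Int × Int)))
            (fun z => by simp) x
            (pvReach_congr (fun z => by simp) x hx))).1
      · intro hx
        exact pvReach_congr (fun z => by simp) x (hreachAll x hx)
    have hcand : ∀ c : Int, ∀ x, x ∈ pvBfs grid c sc n ↔ pvInB n x := by
      intro c
      have hscne : sc ≠ [] := List.ne_nil_of_mem (hsc1 ((0 : Int), (0 : Int)) (by simp))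
      obtain ⟨hc1, hc2, hc3, hc4⟩ := pvBfs_spec grid c n sc hscne hsc2 hsc3
      intro x
      constructor
      · exact hc3 x
      · intro hx
        exact hc1 x ((hscmem x).2 hx)
    have hcandlen : ∀ c : Int, ((pvBfs grid c sc n).length : Int) = n * n := by
      intro c
      have hscne : sc ≠ [] := List.ne_nil_of_mem (hsc1 ((0 : Int), (0 : Int)) (by simp))
      obtain ⟨hc1, hc2, hc3, hc4⟩ := pvBfs_spec grid c n sc hscne hsc2 hsc3
      have hlen2 := pvLenEq hc2 (pvScanNodup n)
        (fun x => (hcand c x).trans (pvMem_scan n x).symm)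
      rw [← pvScanLen n hn0, hlen2]
    rw [pvFoldl_append_if (pvAt grid 0 0) (fun c => (c, pvBfs grid c sc n))
      (PySem.List.pyRange 1 7) []]
    simp only [List.nil_append]
    set cs := (PySem.List.pyRange 1 7).filter (fun x => x ≠ pvAt grid 0 0) with hcs
    rcases hsort : PySem.List.sorted2 (cs.map (fun c => (c, pvBfs grid c sc n)))
        (fun x => -(x.2.length : Int)) (fun x => x.1) with _ | ⟨⟨cm, sm⟩, t⟩
    · exfalso
      have hperm := PySem.List.sorted2_perm (cs.map (fun c => (c, pvBfs grid c sc n)))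
        (fun x => -(x.2.length : Int)) (fun x => x.1) false
      rw [hsort] at hperm
      have h1 := hperm.symm.eq_nil
      have h2 := pvCs_ne (pvAt grid 0 0)
      rw [← hcs] at h2
      rcases hcase : cs with _ | ⟨c1, rest⟩
      · exact h2 hcase
      · rw [hcase] at h1
        simp at h1
    obtain ⟨hmemm, _⟩ := pvHead_min _ _ _ hsort
    obtain ⟨cm', hcm'cs, hcm'⟩ := List.mem_map.1 hmemm
    have hsm : sm = pvBfs grid cm' sc n := (congrArg Prod.snd hcm').symm
    have hsmlen : ((sm.length : Int)) = n * n := by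
      rw [hsm]
      exact hcandlen cm'
    obtain ⟨m, hm⟩ : ∃ m, (n * n).toNat = m + 1 := by
      have : 1 ≤ (n * n).toNat := by
        have h4 : (4 : Int) ≤ n * n := by nlinarith
        omega
      exact ⟨(n * n).toNat - 1, by omega⟩
    rw [hm]
    show (pvSolveLoopA n (m + 1) (pvPaint grid sm cm) sm
        (pvCountsA0.insert cm (pvCountsA0.getD cm 0 + 1)) (0 + 1)).1 = 1
    rw [pvSolveLoopA_succ, if_neg (by rw [hsmlen]; omega)]
    norm_num
  intro hcon
  rw [hB] at hcon
  have := congrArg Prod.fst hcon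
  rw [hA] at this
  simp [pvOutB] at this
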